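-- pv_equiv track=rewrite | github.com/eliottcassidy2000/math | 04-computation/t3_t5_constraint_n7.py | compute_all
-- ===== SOURCE A (Python) =====
-- from itertools import permutations, combinations
-- from collections import defaultdict, Counter
--
-- def compute_all(A, n):
--     """Compute t3, t5, t7, 64*W(0), H all at once."""
--     # t3
--     t3 = 0
--     for i in range(n):
--         for j in range(i+1, n):
--             for k in range(j+1, n):
--                 if A[i][j] and A[j][k] and A[k][i]:
--                     t3 += 1
--                 elif A[i][k] and A[k][j] and A[j][i]:
--                     t3 += 1
--
--     # DP for paths: compute both H and 64*W(0)
--     # dp[mask][v] = (count_of_paths, signed_sum)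
--     dp_count = defaultdict(lambda: defaultdict(int))
--     dp_signed = defaultdict(lambda: defaultdict(int))
--     for v in range(n):
--         dp_count[1 << v][v] = 1
--         dp_signed[1 << v][v] = 1
--
--     for mask in range(1, 1 << n):
--         for v in range(n):
--             c = dp_count[mask].get(v, 0)
--             s = dp_signed[mask].get(v, 0)
--             if c == 0 and s == 0:
--                 continue
--             for u in range(n):
--                 if mask & (1 << u):
--                     continue
--                 new_mask = mask | (1 << u)
--                 if A[v][u]:
--                     dp_count[new_mask][u] += c
--                     dp_signed[new_mask][u] += s  # weight +1
--                 else: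
--                     dp_signed[new_mask][u] -= s  # weight -1
--
--     full = (1 << n) - 1
--     H = sum(dp_count[full].get(v, 0) for v in range(n))
--     alt_sum = sum(dp_signed[full].get(v, 0) for v in range(n))
--
--     # t5 via DP on 5-subsets
--     t5 = 0
--     for subset in combinations(range(n), 5):
--         vs = list(subset)
--         local = [[A[vs[a]][vs[b]] for b in range(5)] for a in range(5)]
--         # DP for Hamiltonian cycle
--         dp5 = defaultdict(set)
--         dp5[1].add(0)
--         for m5 in range(1, 32):
--             if not (m5 & 1):
--                 continue
--             for v in dp5[m5]:
--                 for u in range(5):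
--                     if not (m5 & (1 << u)) and local[v][u]:
--                         dp5[m5 | (1 << u)].add(u)
--         for v in dp5[31]:
--             if local[v][0]:
--                 t5 += 1
--                 break
--
--     # t7: Hamiltonian cycle in full tournament
--     t7 = 0
--     if n == 7:
--         # Use the count DP: check if any Hamiltonian path from v ends at u with edge u->v
--         # Actually simpler: DP for Hamiltonian cycle starting from 0
--         dp7 = defaultdict(set)
--         dp7[1].add(0)
--         for m7 in range(1, 1 << n):
--             if not (m7 & 1):
--                 continue
--             for v in dp7[m7]:
--                 for u in range(n):
--                     if not (m7 & (1 << u)) and A[v][u]: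
--                         dp7[m7 | (1 << u)].add(u)
--         for v in dp7[(1 << n) - 1]:
--             if A[v][0]:
--                 t7 = 1
--                 break
--
--     return t3, t5, t7, alt_sum, H
-- ===== SOURCE B (Python) =====
-- from itertools import combinations
--
--
-- def _paths(A, sub, rest, v):
--     """(number, signed sum) over all orderings of rest + [v], read as a path that
--     ends at sub[v]: pick the predecessor u of v, recurse on the rest."""
--     if not rest:
--         return 1, 1
--     c = s = 0
--     for u in rest:
--         cu, su = _paths(A, sub, [w for w in rest if w != u], u)
--         if A[sub[u]][sub[v]]:
--             c += cu
--             s += su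
--         else:
--             s -= su
--     return c, s
--
--
-- def _hampath(A, sub, rest, v):
--     """Is there a path sub[0] -> ... -> sub[v] visiting sub[u] for every u in rest?"""
--     if not rest:
--         return bool(A[sub[0]][sub[v]])
--     return any(A[sub[u]][sub[v]] and _hampath(A, sub, [w for w in rest if w != u], u)
--                for u in rest)
--
--
-- def compute_all(A, n):
--     """Compute t3, t5, t7, 64*W(0), H all at once (direct recursive enumeration)."""
--     t3 = 0
--     for i in range(n):
--         for j in range(i + 1, n):
--             for k in range(j + 1, n):
--                 if (A[i][j] and A[j][k] and A[k][i]) or (A[i][k] and A[k][j] and A[j][i]):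
--                     t3 += 1
--
--     rng = list(range(n))
--     H = alt_sum = 0
--     for v in rng:
--         c, s = _paths(A, rng, [u for u in rng if u != v], v)
--         H += c
--         alt_sum += s
--
--     t5 = 0
--     for sub in combinations(range(n), 5):
--         if any(A[sub[v]][sub[0]] and _hampath(A, sub, [u for u in range(1, 5) if u != v], v)
--                for v in range(1, 5)):
--             t5 += 1
--
--     t7 = 0
--     if n == 7:
--         rng7 = list(range(7))
--         if any(A[v][0] and _hampath(A, rng7, [u for u in range(1, 7) if u != v], v)
--                for v in range(1, 7)):
--             t7 = 1
--
--     return t3, t5, t7, alt_sum, H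
-- ===== Notes on version B (the rewrite author's own statement) =====
-- stated objective: alternative
-- what changed: The two Held-Karp bitmask DP tables (dp_count/dp_signed) and the two set-valued Hamiltonian-cycle DPs are replaced by direct recursive backtracking enumeration: a choose-the-predecessor recursion _paths(rest, v) returns the (count, signed sum) over all orderings of the remaining vertices ending at v, and _hampath(rest, v) decides existence of a path 0->...->v, used for H/alt_sum, t5 and t7; the t3 triple loop keeps its shape but merges the if/elif into one disjunction; Pre_ excludes exactly the inputs where A raises (n < 0 raises ValueError at 1 << n; …
import Mathlib
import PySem

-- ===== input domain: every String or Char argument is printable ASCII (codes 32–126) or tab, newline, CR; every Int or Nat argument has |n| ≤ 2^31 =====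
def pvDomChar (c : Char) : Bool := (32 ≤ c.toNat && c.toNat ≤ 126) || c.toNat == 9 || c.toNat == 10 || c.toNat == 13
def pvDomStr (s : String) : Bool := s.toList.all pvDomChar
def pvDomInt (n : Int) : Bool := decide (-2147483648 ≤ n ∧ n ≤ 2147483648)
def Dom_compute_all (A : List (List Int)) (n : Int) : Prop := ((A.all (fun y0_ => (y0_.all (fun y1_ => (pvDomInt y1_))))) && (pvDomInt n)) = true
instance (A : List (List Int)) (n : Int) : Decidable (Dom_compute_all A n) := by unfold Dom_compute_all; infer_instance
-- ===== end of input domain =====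

-- B replaces the two Held–Karp bitmask DP tables (and the two set-valued cycle DPs) by direct
-- recursive enumeration of path orderings (choose-the-predecessor backtracking); objective: alternative.

-- ===== PORT A =====
-- A[i][j] with the (total) default read; Pre_ keeps every access in range.
def agA (A : List (List Int)) (i j : Int) : Int :=
  PySem.List.pyGetD (PySem.List.pyGetD A i []) j 0

def t3A (A : List (List Int)) (n : Int) : Int :=
  (PySem.List.pyRange 0 n).foldl (fun acc i =>
    (PySem.List.pyRange (i + 1) n).foldl (fun acc j =>
      (PySem.List.pyRange (j + 1) n).foldl (fun acc k =>
        if agA A i j ≠ 0 ∧ agA A j k ≠ 0 ∧ agA A k i ≠ 0 then acc + 1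
        else if agA A i k ≠ 0 ∧ agA A k j ≠ 0 ∧ agA A j i ≠ 0 then acc + 1
        else acc) acc) acc) 0

-- dp_count / dp_signed : defaultdict(mask -> defaultdict(v -> int)); the pair of dicts is the loop state.
-- (defaultdict subscripting also inserts empty inner dicts; that never changes any looked-up value,
-- so the port reads with getD.)
def pvSt : Type := PySem.Dict Int (PySem.Dict Int Int) × PySem.Dict Int (PySem.Dict Int Int)

-- dp[m][u] = w  (assignment) and dp[m][u] += δ (defaultdict increment)
def setA (d : PySem.Dict Int (PySem.Dict Int Int)) (m u w : Int) : PySem.Dict Int (PySem.Dict Int Int) :=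
  d.insert m ((d.getD m PySem.Dict.empty).insert u w)

def bumpA (d : PySem.Dict Int (PySem.Dict Int Int)) (m u δ : Int) : PySem.Dict Int (PySem.Dict Int Int) :=
  d.insert m ((d.getD m PySem.Dict.empty).insert u ((d.getD m PySem.Dict.empty).getD u 0 + δ))

def initStep (st : pvSt) (v : Int) : pvSt :=
  (setA st.1 ((1 : Int) <<< v.toNat) v 1, setA st.2 ((1 : Int) <<< v.toNat) v 1)

def initA (n : Int) : pvSt :=
  (PySem.List.pyRange 0 n).foldl initStep (PySem.Dict.empty, PySem.Dict.empty)

def stepUA (A : List (List Int)) (v c s mask : Int) (st : pvSt) (u : Int) : pvSt :=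
  if PySem.Int.band mask ((1 : Int) <<< u.toNat) ≠ 0 then st
  else
    let nm := PySem.Int.bor mask ((1 : Int) <<< u.toNat)
    if agA A v u ≠ 0 then (bumpA st.1 nm u c, bumpA st.2 nm u s)
    else (st.1, bumpA st.2 nm u (-s))

def stepVA (A : List (List Int)) (n mask : Int) (st : pvSt) (v : Int) : pvSt :=
  let c := (st.1.getD mask PySem.Dict.empty).getD v 0
  let s := (st.2.getD mask PySem.Dict.empty).getD v 0
  if c = 0 ∧ s = 0 then st
  else (PySem.List.pyRange 0 n).foldl (stepUA A v c s mask) st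

def dpA (A : List (List Int)) (n : Int) : pvSt :=
  (PySem.List.pyRange 1 ((1 : Int) <<< n.toNat)).foldl
    (fun st mask => (PySem.List.pyRange 0 n).foldl (stepVA A n mask) st)
    (initA n)

def sumRowA (d : PySem.Dict Int (PySem.Dict Int Int)) (m n : Int) : Int :=
  (PySem.List.pyRange 0 n).foldl (fun acc v => acc + (d.getD m PySem.Dict.empty).getD v 0) 0

-- the set-valued Hamiltonian-path DP (dp5 / dp7 are this same loop, over `local` resp. A)
def setStepU (Mx : List (List Int)) (m5 : Int) (d : PySem.Dict Int (PySem.Set Int)) (v u : Int) :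
    PySem.Dict Int (PySem.Set Int) :=
  if PySem.Int.band m5 ((1 : Int) <<< u.toNat) = 0 ∧ agA Mx v u ≠ 0 then
    let nm := PySem.Int.bor m5 ((1 : Int) <<< u.toNat)
    d.insert nm ((d.getD nm PySem.Set.empty).add u)
  else d

def setDP (Mx : List (List Int)) (kk top : Int) : PySem.Dict Int (PySem.Set Int) :=
  let d0 : PySem.Dict Int (PySem.Set Int) := PySem.Dict.empty.insert 1 (PySem.Set.add PySem.Set.empty 0)
  (PySem.List.pyRange 1 top).foldl
    (fun d m5 =>
      if PySem.Int.band m5 1 = 0 then d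
      else
        (d.getD m5 PySem.Set.empty).foldl
          (fun d v => (PySem.List.pyRange 0 kk).foldl (fun d u => setStepU Mx m5 d v u) d) d)
    d0

def localM (A : List (List Int)) (vs : List Int) : List (List Int) :=
  (PySem.List.pyRange 0 5).map (fun a =>
    (PySem.List.pyRange 0 5).map (fun b =>
      agA A (PySem.List.pyGetD vs a 0) (PySem.List.pyGetD vs b 0)))

def t5A (A : List (List Int)) (n : Int) : Int :=
  (PySem.List.combinations (PySem.List.pyRange 0 n) 5).foldl
    (fun acc subset =>
      let lo := localM A subset
      let d := setDP lo 5 32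
      if (d.getD 31 PySem.Set.empty).any (fun v => agA lo v 0 != 0) then acc + 1 else acc) 0

def t7A (A : List (List Int)) (n : Int) : Int :=
  if n = 7 then
    let d := setDP A n ((1 : Int) <<< n.toNat)
    if (d.getD ((1 : Int) <<< n.toNat - 1) PySem.Set.empty).any (fun v => agA A v 0 != 0) then 1 else 0
  else 0

def compute_all (A : List (List Int)) (n : Int) : Int × Int × Int × Int × Int :=
  let st := dpA A n
  let full := (1 : Int) <<< n.toNat - 1
  (t3A A n, t5A A n, t7A A n, sumRowA st.2 full n, sumRowA st.1 full n)

-- ===== PORT B =====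
-- (B reads A[i][j] exactly like A does, so the subscript helper agA is shared)
-- termination helper for B's backtracking recursion
theorem pv_filter_ne_length_lt {rest : List Int} {u : Int} (hu : u ∈ rest) :
    (rest.filter (fun w => w != u)).length < rest.length := by
  induction rest with
  | nil => cases hu
  | cons x xs ih =>
    by_cases hx : x = u
    · subst hx
      simp only [List.filter_cons, bne_self_eq_false]
      have := List.length_filter_le (fun w => w != x) xs
      simpa using Nat.lt_succ_of_le this
    · rcases List.mem_cons.mp hu with h | h
      · exact absurd h.symm hx
      · simp only [List.filter_cons]
        have hb : (x != u) = true := by simpa using hx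
        rw [hb]
        simpa using Nat.succ_lt_succ (ih h)

-- (count, signed sum) over all orderings of rest + [v], as a path ending at sub[v]
def pathsB (A : List (List Int)) (sub : List Int) (rest : List Int) (v : Int) : Int × Int :=
  if rest = [] then (1, 1)
  else
    rest.attach.foldl
      (fun cs u =>
        let r := pathsB A sub (rest.filter (fun w => w != u.1)) u.1
        if agA A (PySem.List.pyGetD sub u.1 0) (PySem.List.pyGetD sub v 0) ≠ 0 then
          (cs.1 + r.1, cs.2 + r.2)
        else (cs.1, cs.2 - r.2))
      (0, 0)
termination_by rest.length
decreasing_by simpa using pv_filter_ne_length_lt u.2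

-- is there a path sub[0] -> … -> sub[v] visiting sub[u] for every u in rest?
def hampathB (A : List (List Int)) (sub : List Int) (rest : List Int) (v : Int) : Bool :=
  if rest = [] then agA A (PySem.List.pyGetD sub 0 0) (PySem.List.pyGetD sub v 0) != 0
  else
    rest.attach.any (fun u =>
      (agA A (PySem.List.pyGetD sub u.1 0) (PySem.List.pyGetD sub v 0) != 0) &&
        hampathB A sub (rest.filter (fun w => w != u.1)) u.1)
termination_by rest.length
decreasing_by simpa using pv_filter_ne_length_lt u.2

def compute_all_alt (A : List (List Int)) (n : Int) : Int × Int × Int × Int × Int :=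
  let t3 :=
    (PySem.List.pyRange 0 n).foldl (fun acc i =>
      (PySem.List.pyRange (i + 1) n).foldl (fun acc j =>
        (PySem.List.pyRange (j + 1) n).foldl (fun acc k =>
          if (agA A i j ≠ 0 ∧ agA A j k ≠ 0 ∧ agA A k i ≠ 0) ∨
             (agA A i k ≠ 0 ∧ agA A k j ≠ 0 ∧ agA A j i ≠ 0) then acc + 1
          else acc) acc) acc) 0
  let rng := PySem.List.pyRange 0 n
  let hs :=
    rng.foldl
      (fun (p : Int × Int) v =>
        let cs := pathsB A rng (rng.filter (fun u => u != v)) v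
        (p.1 + cs.1, p.2 + cs.2))
      (0, 0)
  let t5 :=
    (PySem.List.combinations rng 5).foldl
      (fun acc sub =>
        if (PySem.List.pyRange 1 5).any (fun v =>
            (agA A (PySem.List.pyGetD sub v 0) (PySem.List.pyGetD sub 0 0) != 0) &&
              hampathB A sub ((PySem.List.pyRange 1 5).filter (fun u => u != v)) v) then
          acc + 1
        else acc) 0
  let t7 : Int :=
    if n = 7 then
      let rng7 := PySem.List.pyRange 0 7
      if (PySem.List.pyRange 1 7).any (fun v =>
          (agA A v 0 != 0) &&
            hampathB A rng7 ((PySem.List.pyRange 1 7).filter (fun u => u != v)) v) then 1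
      else 0
    else 0
  (t3, t5, t7, hs.2, hs.1)

-- ===== PRECONDITION & SPEC =====
-- Pre_ is exactly where the Python A returns: n ≥ 0 (1 << n raises ValueError for n < 0) and, for
-- n ≥ 2, every accessed A[i][j] exists (for n ≤ 4 row n-1 is only read up to column n-2; for n ≥ 5
-- the t5 block also reads the diagonal entry of the last row).
def Pre_compute_all (A : List (List Int)) (n : Int) : Prop :=
  0 ≤ n ∧ (n ≤ 1 ∨ (n ≤ A.length ∧ ∀ i : Nat, i < n.toNat →
    n.toNat - (if n ≤ 4 ∧ i + 1 = n.toNat then 1 else 0) ≤ (A.getD i []).length))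
instance (A : List (List Int)) (n : Int) : Decidable (Pre_compute_all A n) := by
  unfold Pre_compute_all; infer_instance

def pvWitness_compute_all : List (List Int) × Int := ([[0, 1], [1, 0]], 2)

def Spec_compute_all (A : List (List Int)) (n : Int) (out : Int × Int × Int × Int × Int) : Prop :=
  out = compute_all_alt A n
instance (A : List (List Int)) (n : Int) (out : Int × Int × Int × Int × Int) :
    Decidable (Spec_compute_all A n out) := by unfold Spec_compute_all; infer_instance

-- ===== CLAIM (what is proved, stated in full; the proofs are below) =====
def Claim_equal_compute_all : Prop :=
  ∀ (A : List (List Int)) (n : Int), Dom_compute_all A n → Pre_compute_all A n →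
    Spec_compute_all A n (compute_all A n)

-- ===== LEMMAS AND PROOFS =====

-- The two ports are in fact equal on EVERY input (both are total, out-of-range reads defaulted);
-- everything below proves that unconditional statement.

-- ---- basic cast / bit lemmas ----

theorem pvShift1 (t : Nat) : ((1 : Int) <<< t) = ((2 ^ t : Nat) : Int) := by
  rw [Int.shiftLeft_eq]; push_cast; ring

theorem pvShiftNonneg (t : Nat) : (0 : Int) ≤ (1 : Int) <<< t := by
  rw [pvShift1]; positivity

theorem pvBandPow (m : Int) (hm : 0 ≤ m) (t : Nat) :
    PySem.Int.band m ((1 : Int) <<< t) = 0 ↔ m.toNat.testBit t = false := by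
  rw [pvShift1, PySem.Int.band_of_nonneg hm (by positivity)]
  rw [Int.toNat_natCast, Nat.and_two_pow]
  cases h : m.toNat.testBit t <;> simp [h]

theorem pvBorPow (m : Int) (hm : 0 ≤ m) (t : Nat) :
    PySem.Int.bor m ((1 : Int) <<< t) = ((m.toNat ||| 2 ^ t : Nat) : Int) := by
  rw [pvShift1, PySem.Int.bor_of_nonneg hm (by positivity), Int.toNat_natCast]

theorem pvBorNe (m : Int) (hm : 0 ≤ m) (t : Nat) (h : m.toNat.testBit t = false) :
    PySem.Int.bor m ((1 : Int) <<< t) ≠ m := by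
  rw [pvBorPow m hm t]
  intro hc
  have : (m.toNat ||| 2 ^ t : Nat) = m.toNat := by
    have := congrArg Int.toNat hc
    simpa using this
  have hb := congrArg (fun x => Nat.testBit x t) this
  simp [Nat.testBit_or, h] at hb

theorem pvOrPowNe (M t : Nat) (hM : 1 ≤ M) (h : M.testBit t = false) : M ||| 2 ^ t ≠ 2 ^ t := by
  intro hc
  have hz : M = 0 := by
    apply Nat.eq_of_testBit_eq
    intro j
    by_cases hj : j = t
    · simp [hj, h]
    · have := congrArg (fun x => Nat.testBit x j) hc
      simpa [Nat.testBit_or, Nat.testBit_two_pow, Ne.symm hj] using this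
  omega

theorem pvOrXor (M t : Nat) (h : M.testBit t = false) : (M ||| 2 ^ t) ^^^ 2 ^ t = M := by
  apply Nat.eq_of_testBit_eq
  intro j
  by_cases hj : j = t <;>
    simp [Nat.testBit_xor, Nat.testBit_or, Nat.testBit_two_pow, hj, h, Ne.symm]

theorem pvXorLt {m v : Nat} (h : m.testBit v = true) : m ^^^ 2 ^ v < m := by
  apply Nat.lt_of_testBit v
  · simp [Nat.testBit_xor, h, Nat.testBit_two_pow]
  · exact h
  · intro j hj
    have h2 : (2 ^ v).testBit j = false := by
      simp only [Nat.testBit_two_pow]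
      simp; omega
    simp [Nat.testBit_xor, h2]

theorem pvXorRecover {m t : Nat} (hbit : m.testBit t = true) : (m ^^^ 2 ^ t) ||| 2 ^ t = m := by
  apply Nat.eq_of_testBit_eq
  intro j
  by_cases hj : j = t <;>
    simp [Nat.testBit_or, Nat.testBit_xor, Nat.testBit_two_pow, hj, hbit, Ne.symm]

theorem pvXorNoBit {m t : Nat} (hbit : m.testBit t = true) : (m ^^^ 2 ^ t).testBit t = false := by
  simp [Nat.testBit_xor, hbit, Nat.testBit_two_pow]

-- ---- pyRange lemmas ----

theorem pvRange0 (n : Int) :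
    PySem.List.pyRange 0 n = (List.range n.toNat).map (fun k : Nat => (k : Int)) := by
  by_cases h : 0 ≤ n
  · obtain ⟨m, rfl⟩ : ∃ m : Nat, n = (m : Int) := ⟨n.toNat, by omega⟩
    rw [PySem.List.pyRange_zero_natCast]
    simp only [Int.toNat_natCast]
  · have h1 : PySem.List.pyRange 0 n = [] := by
      apply List.eq_nil_iff_forall_not_mem.mpr
      intro x hx
      have := PySem.List.mem_pyRange_one.mp hx
      omega
    have h2 : n.toNat = 0 := by omega
    simp [h1, h2]

theorem pvRangeNil {a b : Int} (h : b ≤ a) : PySem.List.pyRange a b = [] := by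
  apply List.eq_nil_iff_forall_not_mem.mpr
  intro x hx
  have := PySem.List.mem_pyRange_one.mp hx
  omega

theorem pvRangeNodup (n : Int) : (PySem.List.pyRange 0 n).Nodup := by
  rw [pvRange0]
  refine List.Nodup.map ?_ List.nodup_range
  intro a b hab
  simp only at hab
  exact_mod_cast hab

theorem pvMemRange0 {n x : Int} : x ∈ PySem.List.pyRange 0 n ↔ 0 ≤ x ∧ x < n :=
  PySem.List.mem_pyRange_one

-- ---- the reference recursions: gsp (count, signed) and rch (reachability) ----

def gsp (adj : Nat → Nat → Bool) (k : Nat) (m v : Nat) : Int × Int :=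
  if hb : m.testBit v = true then
    if m = 2 ^ v then (1, 1)
    else
      (List.range k).foldl
        (fun cs u =>
          if (m ^^^ 2 ^ v).testBit u = true then
            let p := gsp adj k (m ^^^ 2 ^ v) u
            if adj u v then (cs.1 + p.1, cs.2 + p.2) else (cs.1, cs.2 - p.2)
          else cs)
        (0, 0)
  else (0, 0)
termination_by m
decreasing_by exact pvXorLt hb

def rch (adj : Nat → Nat → Bool) (k : Nat) (m v : Nat) : Bool :=
  if hb : m.testBit v = true then
    if m = 2 ^ v then v == 0
    else
      (List.range k).any (fun u =>
        (m ^^^ 2 ^ v).testBit u && adj u v && rch adj k (m ^^^ 2 ^ v) u)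
  else false
termination_by m
decreasing_by exact pvXorLt hb

theorem pvFoldPair {β : Type} (step : Int × Int → β → Int × Int) (F G : β → Int)
    (h : ∀ cs u, step cs u = (cs.1 + F u, cs.2 + G u)) :
    ∀ (L : List β) (a b : Int), L.foldl step (a, b) = (a + (L.map F).sum, b + (L.map G).sum) := by
  intro L
  induction L with
  | nil => intro a b; simp
  | cons x xs ih =>
    intro a b
    rw [List.foldl_cons, h]
    rw [ih]
    simp
    constructor <;> ring

theorem gsp_eq (adj : Nat → Nat → Bool) (k : Nat) (m v : Nat)
    (hb : m.testBit v = true) (hne : m ≠ 2 ^ v) :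
    gsp adj k m v =
      (((List.range k).map (fun u =>
          if (m ^^^ 2 ^ v).testBit u = true ∧ adj u v = true then (gsp adj k (m ^^^ 2 ^ v) u).1 else 0)).sum,
       ((List.range k).map (fun u =>
          if (m ^^^ 2 ^ v).testBit u = true then
            (if adj u v = true then (gsp adj k (m ^^^ 2 ^ v) u).2 else -(gsp adj k (m ^^^ 2 ^ v) u).2)
          else 0)).sum) := by
  conv_lhs => rw [gsp]
  rw [dif_pos hb, if_neg hne]
  rw [pvFoldPair _
    (fun u => if (m ^^^ 2 ^ v).testBit u = true ∧ adj u v = true then (gsp adj k (m ^^^ 2 ^ v) u).1 else 0)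
    (fun u => if (m ^^^ 2 ^ v).testBit u = true then
        (if adj u v = true then (gsp adj k (m ^^^ 2 ^ v) u).2 else -(gsp adj k (m ^^^ 2 ^ v) u).2)
      else 0)
    (by
      intro cs u
      by_cases h1 : (m ^^^ 2 ^ v).testBit u = true
      · by_cases h2 : adj u v = true <;> simp [h1, h2, sub_eq_add_neg]
      · simp [h1])]
  simp

theorem rch_testBit {adj : Nat → Nat → Bool} {k m v : Nat} (h : rch adj k m v = true) :
    m.testBit v = true := by
  rw [rch] at h
  by_cases hb : m.testBit v = true
  · exact hb
  · simp [hb] at h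

theorem rch_even {adj : Nat → Nat → Bool} {k : Nat} :
    ∀ (m : Nat) (v : Nat), m.testBit 0 = false → rch adj k m v = false := by
  intro m
  induction m using Nat.strong_induction_on with
  | _ m ih =>
    intro v h0
    rw [rch]
    by_cases hb : m.testBit v = true
    · rw [dif_pos hb]
      have hv0 : v ≠ 0 := by
        intro hv; rw [hv] at hb; rw [hb] at h0; cases h0
      by_cases he : m = 2 ^ v
      · rw [if_pos he]; simp [hv0]
      · rw [if_neg he]
        apply List.any_eq_false.mpr
        intro u _
        have hx0 : (m ^^^ 2 ^ v).testBit 0 = false := by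
          rw [Nat.testBit_xor, h0, Nat.testBit_two_pow]
          simp [hv0]
        have hrec : rch adj k (m ^^^ 2 ^ v) u = false := ih _ (pvXorLt hb) u hx0
        simp [hrec]
    · simp [hb]

-- adjacency congruence for the reference recursions
theorem gsp_congr {adj1 adj2 : Nat → Nat → Bool} {k : Nat}
    (h : ∀ u < k, ∀ w < k, adj1 u w = adj2 u w) :
    ∀ m v, v < k → gsp adj1 k m v = gsp adj2 k m v := by
  intro m
  induction m using Nat.strong_induction_on with
  | _ m ih =>
    intro v hv
    rw [gsp, gsp]
    by_cases hb : m.testBit v = true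
    · rw [dif_pos hb, dif_pos hb]
      by_cases he : m = 2 ^ v
      · rw [if_pos he, if_pos he]
      · rw [if_neg he, if_neg he]
        apply PySem.List.foldl_congr_mem
        intro cs u hu
        have hu' : u < k := List.mem_range.mp hu
        by_cases ht : (m ^^^ 2 ^ v).testBit u = true
        · rw [if_pos ht, if_pos ht]
          rw [ih _ (pvXorLt hb) u hu', h u hu' v hv]
        · rw [if_neg ht, if_neg ht]
    · rw [dif_neg hb, dif_neg hb]

theorem rch_congr {adj1 adj2 : Nat → Nat → Bool} {k : Nat}
    (h : ∀ u < k, ∀ w < k, adj1 u w = adj2 u w) :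
    ∀ m v, v < k → rch adj1 k m v = rch adj2 k m v := by
  intro m
  induction m using Nat.strong_induction_on with
  | _ m ih =>
    intro v hv
    rw [rch, rch]
    by_cases hb : m.testBit v = true
    · rw [dif_pos hb, dif_pos hb]
      by_cases he : m = 2 ^ v
      · rw [if_pos he, if_pos he]
      · rw [if_neg he, if_neg he]
        apply PySem.List.any_congr_mem
        intro u hu
        have hu' : u < k := List.mem_range.mp hu
        rw [ih _ (pvXorLt hb) u hu', h u hu' v hv]
    · rw [dif_neg hb, dif_neg hb]

-- ---- vertex-set masks for B's list-based recursion ----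

def maskOf (l : List Int) : Nat := l.foldr (fun x m => m ||| 2 ^ x.toNat) 0

theorem maskOf_testBit (l : List Int) (h : ∀ x ∈ l, 0 ≤ x) (b : Nat) :
    (maskOf l).testBit b = decide ((b : Int) ∈ l) := by
  induction l with
  | nil => simp [maskOf]
  | cons x xs ih =>
    have hx : 0 ≤ x := h x (List.mem_cons_self)
    have ih' := ih (fun y hy => h y (List.mem_cons_of_mem _ hy))
    simp only [maskOf, List.foldr_cons] at *
    rw [Nat.testBit_or, ih']
    simp only [Nat.testBit_two_pow, List.mem_cons]
    by_cases hbx : (b : Int) = x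
    · have : x.toNat = b := by omega
      simp [this, hbx]
    · have : x.toNat ≠ b := by omega
      simp [this, hbx]

theorem maskOf_filter (l : List Int) (h : ∀ x ∈ l, 0 ≤ x) (u : Int) (hu : u ∈ l) :
    maskOf (l.filter (fun w => w != u)) ||| 2 ^ u.toNat = maskOf l := by
  have hu0 : 0 ≤ u := h u hu
  apply Nat.eq_of_testBit_eq
  intro b
  rw [Nat.testBit_or, maskOf_testBit _ (fun x hx => h x (List.mem_of_mem_filter hx)) b,
      maskOf_testBit _ h b, Nat.testBit_two_pow]
  simp only [List.mem_filter, bne_iff_ne]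
  by_cases hbu : (b : Int) = u
  · have : u.toNat = b := by omega
    simp [this, hbu, hu]
  · have : u.toNat ≠ b := by omega
    simp [this, hbu]

theorem maskOf_nonneg_mem {l : List Int} (h : ∀ x ∈ l, 0 ≤ x) {x : Int} (hx : x ∈ l) :
    (maskOf l).testBit x.toNat = true := by
  rw [maskOf_testBit l h]
  have : ((x.toNat : Nat) : Int) = x := by have := h x hx; omega
  simp [this, hx]

-- sum over a 0/else-gated range equals the sum over the member list
theorem pvSumIfFilter {p : Nat → Bool} {g : Nat → Int} :
    ∀ L : List Nat, (L.map (fun u => if p u = true then g u else 0)).sum = ((L.filter p).map g).sum := by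
  intro L
  induction L with
  | nil => simp
  | cons x xs ih =>
    by_cases hx : p x = true <;> simp [hx, ih, List.filter_cons]

theorem pvSumOverMask (k : Nat) (p : Nat → Bool) (g : Nat → Int) (S : List Nat)
    (hS : S.Nodup) (hk : ∀ u ∈ S, u < k) (hp : ∀ u, p u = true ↔ u ∈ S) :
    ((List.range k).map (fun u => if p u = true then g u else 0)).sum = (S.map g).sum := by
  rw [pvSumIfFilter]
  have hperm : ((List.range k).filter p).Perm S := by
    rw [List.perm_ext_iff_of_nodup (List.Nodup.filter _ List.nodup_range) hS]
    intro a
    simp only [List.mem_filter, List.mem_range]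
    constructor
    · rintro ⟨_, hpa⟩; exact (hp a).mp hpa
    · intro ha; exact ⟨hk a ha, (hp a).mpr ha⟩
  exact (hperm.map g).sum_eq

-- ---- B's recursions compute the reference recursions ----

def adjSub (A : List (List Int)) (sub : List Int) (u w : Nat) : Bool :=
  agA A (PySem.List.pyGetD sub (u : Int) 0) (PySem.List.pyGetD sub (w : Int) 0) != 0

theorem pvNodupToNat {l : List Int} (hnd : l.Nodup) (h : ∀ x ∈ l, 0 ≤ x) :
    (l.map Int.toNat).Nodup := by
  induction l with
  | nil => simp
  | cons x xs ih =>
    rcases List.nodup_cons.mp hnd with ⟨hx, hxs⟩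
    refine List.nodup_cons.mpr ⟨?_, ih hxs (fun y hy => h y (List.mem_cons_of_mem _ hy))⟩
    intro hmem
    rcases List.mem_map.mp hmem with ⟨y, hy, hyx⟩
    have : y = x := by
      have := h x List.mem_cons_self
      have := h y (List.mem_cons_of_mem _ hy)
      omega
    exact hx (this ▸ hy)

theorem pvMemMapToNat {l : List Int} (h : ∀ x ∈ l, 0 ≤ x) (u : Nat) :
    u ∈ l.map Int.toNat ↔ (u : Int) ∈ l := by
  constructor
  · intro hm
    rcases List.mem_map.mp hm with ⟨y, hy, rfl⟩
    have := h y hy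
    have : ((y.toNat : Nat) : Int) = y := by omega
    rw [this]; exact hy
  · intro hm
    exact List.mem_map.mpr ⟨(u : Int), hm, by simp⟩

theorem pvRestMaskBit {rest : List Int} (h : ∀ x ∈ rest, 0 ≤ x) (u : Nat) :
    (maskOf rest).testBit u = true ↔ u ∈ rest.map Int.toNat := by
  rw [maskOf_testBit rest h u, pvMemMapToNat h u]
  simp

theorem pvAttachMap {α β : Type} (l : List α) (f : α → β) :
    l.attach.map (fun u => f u.1) = l.map f := List.attach_map_val

theorem pathsB_eq (A : List (List Int)) (sub : List Int) (k : Nat) :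
    ∀ (rest : List Int) (v : Int), rest.Nodup → (∀ x ∈ rest, 0 ≤ x ∧ x.toNat < k) →
      0 ≤ v → v.toNat < k → v ∉ rest →
      pathsB A sub rest v = gsp (adjSub A sub) k (maskOf rest ||| 2 ^ v.toNat) v.toNat := by
  suffices H : ∀ (N : Nat) (rest : List Int) (v : Int), rest.length ≤ N → rest.Nodup →
      (∀ x ∈ rest, 0 ≤ x ∧ x.toNat < k) → 0 ≤ v → v.toNat < k → v ∉ rest →
      pathsB A sub rest v = gsp (adjSub A sub) k (maskOf rest ||| 2 ^ v.toNat) v.toNat by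
    exact fun rest v h1 h2 h3 h4 h5 => H rest.length rest v le_rfl h1 h2 h3 h4 h5
  intro N
  induction N with
  | zero =>
    intro rest v hlen _ _ _ _ _
    have hr : rest = [] := List.eq_nil_of_length_eq_zero (by omega)
    subst hr
    rw [pathsB, if_pos rfl]
    show (1, 1) = gsp (adjSub A sub) k (maskOf [] ||| 2 ^ v.toNat) v.toNat
    rw [show maskOf [] ||| 2 ^ v.toNat = 2 ^ v.toNat from by simp [maskOf]]
    rw [gsp, dif_pos Nat.testBit_two_pow_self, if_pos rfl]
  | succ N ih =>
    intro rest v hlen hnd helem hv0 hvk hvmem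
    by_cases hr : rest = []
    · subst hr
      rw [pathsB, if_pos rfl]
      rw [show maskOf [] ||| 2 ^ v.toNat = 2 ^ v.toNat from by simp [maskOf]]
      rw [gsp, dif_pos Nat.testBit_two_pow_self, if_pos rfl]
    · -- notation
      have hnn : ∀ x ∈ rest, 0 ≤ x := fun x hx => (helem x hx).1
      set t := v.toNat with ht
      have hvcast : ((t : Nat) : Int) = v := by omega
      set m := maskOf rest ||| 2 ^ t with hm
      have hbm : m.testBit t = true := by
        rw [hm, Nat.testBit_or, Nat.testBit_two_pow_self, Bool.or_true]
      obtain ⟨y, hy⟩ := List.exists_mem_of_ne_nil rest hr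
      have hyt : y.toNat ≠ t := by
        have := hnn y hy
        intro hc
        exact hvmem (by rw [← hvcast, ← hc, show ((y.toNat : Nat) : Int) = y from by omega]; exact hy)
      have hne : m ≠ 2 ^ t := by
        intro hc
        have hby : m.testBit y.toNat = true := by
          rw [hm, Nat.testBit_or, maskOf_nonneg_mem hnn hy, Bool.true_or]
        rw [hc, Nat.testBit_two_pow] at hby
        simp [Ne.symm hyt] at hby
      have hmasknot : (maskOf rest).testBit t = false := by
        rw [maskOf_testBit rest hnn t, hvcast]
        simp [hvmem]
      have hr' : m ^^^ 2 ^ t = maskOf rest := by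
        rw [hm, pvOrXor _ _ hmasknot]
      -- LHS: unfold one step of pathsB and turn the fold into two sums over rest
      rw [pathsB, if_neg hr]
      rw [pvFoldPair _
        (fun u : {x // x ∈ rest} =>
          if agA A (PySem.List.pyGetD sub u.1 0) (PySem.List.pyGetD sub v 0) ≠ 0 then
            (pathsB A sub (rest.filter (fun w => w != u.1)) u.1).1 else 0)
        (fun u : {x // x ∈ rest} =>
          if agA A (PySem.List.pyGetD sub u.1 0) (PySem.List.pyGetD sub v 0) ≠ 0 then
            (pathsB A sub (rest.filter (fun w => w != u.1)) u.1).2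
          else -(pathsB A sub (rest.filter (fun w => w != u.1)) u.1).2)
        (by
          intro cs u
          by_cases he : agA A (PySem.List.pyGetD sub u.1 0) (PySem.List.pyGetD sub v 0) ≠ 0
          · simp only [if_pos he]
          · simp only [if_neg he, sub_eq_add_neg]
            simp)]
      -- RHS via gsp_eq
      rw [gsp_eq _ _ _ _ hbm hne, hr']
      -- per-element rewriting of the recursive calls
      have hstep : ∀ x ∈ rest,
          pathsB A sub (rest.filter (fun w => w != x)) x
            = gsp (adjSub A sub) k (maskOf rest) x.toNat := by
        intro x hx
        have hflt : (rest.filter (fun w => w != x)).length < rest.length :=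
          pv_filter_ne_length_lt hx
        have hxnotmem : x ∉ rest.filter (fun w => w != x) := by
          intro hc
          have := List.mem_filter.mp hc
          simp at this
        have hrec := ih (rest.filter (fun w => w != x)) x (by omega)
          (List.Nodup.filter _ hnd)
          (fun z hz => helem z (List.mem_of_mem_filter hz))
          (helem x hx).1 (helem x hx).2 hxnotmem
        rw [hrec, maskOf_filter rest hnn x hx]
      have hadj : ∀ x ∈ rest,
          adjSub A sub x.toNat t
            = (agA A (PySem.List.pyGetD sub x 0) (PySem.List.pyGetD sub v 0) != 0) := by
        intro x hx
        have hxc : ((x.toNat : Nat) : Int) = x := by have := hnn x hx; omega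
        rw [adjSub, hxc, hvcast]
      have hS : (rest.map Int.toNat).Nodup := pvNodupToNat hnd hnn
      have hkS : ∀ u ∈ rest.map Int.toNat, u < k := by
        intro u hu
        rcases List.mem_map.mp hu with ⟨y, hy, rfl⟩
        exact (helem y hy).2
      have hpS : ∀ u, (maskOf rest).testBit u = true ↔ u ∈ rest.map Int.toNat :=
        pvRestMaskBit hnn
      have hat1 : (rest.attach.map (fun u =>
          if agA A (PySem.List.pyGetD sub u.1 0) (PySem.List.pyGetD sub v 0) ≠ 0 then
            (pathsB A sub (rest.filter (fun w => w != u.1)) u.1).1 else 0))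
          = rest.map (fun x =>
          if agA A (PySem.List.pyGetD sub x 0) (PySem.List.pyGetD sub v 0) ≠ 0 then
            (pathsB A sub (rest.filter (fun w => w != x)) x).1 else 0) :=
        pvAttachMap rest (fun x =>
          if agA A (PySem.List.pyGetD sub x 0) (PySem.List.pyGetD sub v 0) ≠ 0 then
            (pathsB A sub (rest.filter (fun w => w != x)) x).1 else 0)
      have hat2 : (rest.attach.map (fun u =>
          if agA A (PySem.List.pyGetD sub u.1 0) (PySem.List.pyGetD sub v 0) ≠ 0 then
            (pathsB A sub (rest.filter (fun w => w != u.1)) u.1).2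
          else -(pathsB A sub (rest.filter (fun w => w != u.1)) u.1).2))
          = rest.map (fun x =>
          if agA A (PySem.List.pyGetD sub x 0) (PySem.List.pyGetD sub v 0) ≠ 0 then
            (pathsB A sub (rest.filter (fun w => w != x)) x).2
          else -(pathsB A sub (rest.filter (fun w => w != x)) x).2) :=
        pvAttachMap rest (fun x =>
          if agA A (PySem.List.pyGetD sub x 0) (PySem.List.pyGetD sub v 0) ≠ 0 then
            (pathsB A sub (rest.filter (fun w => w != x)) x).2
          else -(pathsB A sub (rest.filter (fun w => w != x)) x).2)
      refine Prod.ext ?_ ?_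
      · dsimp only
        rw [zero_add, hat1]
        have h1 : ((List.range k).map (fun u =>
            if (maskOf rest).testBit u = true ∧ adjSub A sub u t = true then
              (gsp (adjSub A sub) k (maskOf rest) u).1 else 0)).sum
            = ((List.range k).map (fun u =>
            if (maskOf rest).testBit u = true then
              (if adjSub A sub u t = true then (gsp (adjSub A sub) k (maskOf rest) u).1 else 0)
            else 0)).sum := by
          congr 1
          apply List.map_congr_left
          intro u _
          by_cases hb1 : (maskOf rest).testBit u = true <;> simp [hb1]
        rw [h1, pvSumOverMask k _ _ (rest.map Int.toNat) hS hkS hpS, List.map_map]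
        congr 1
        apply List.map_congr_left
        intro x hx
        show _ = if adjSub A sub x.toNat t = true then (gsp (adjSub A sub) k (maskOf rest) x.toNat).1 else 0
        rw [hadj x hx]
        by_cases hprop : agA A (PySem.List.pyGetD sub x 0) (PySem.List.pyGetD sub v 0) ≠ 0
        · rw [if_pos hprop, if_pos (by simpa [bne_iff_ne] using hprop), hstep x hx]
        · rw [if_neg hprop, if_neg (by simpa [bne_iff_ne] using hprop)]
      · dsimp only
        rw [zero_add, hat2]
        have h1 : ((List.range k).map (fun u =>
            if (maskOf rest).testBit u = true then
              (if adjSub A sub u t = true then (gsp (adjSub A sub) k (maskOf rest) u).2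
               else -(gsp (adjSub A sub) k (maskOf rest) u).2)
            else 0)).sum
            = ((rest.map Int.toNat).map (fun u =>
              if adjSub A sub u t = true then (gsp (adjSub A sub) k (maskOf rest) u).2
              else -(gsp (adjSub A sub) k (maskOf rest) u).2)).sum :=
          pvSumOverMask k _ _ (rest.map Int.toNat) hS hkS hpS
        rw [h1, List.map_map]
        congr 1
        apply List.map_congr_left
        intro x hx
        show _ = if adjSub A sub x.toNat t = true then (gsp (adjSub A sub) k (maskOf rest) x.toNat).2
                 else -(gsp (adjSub A sub) k (maskOf rest) x.toNat).2
        rw [hadj x hx]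
        by_cases hprop : agA A (PySem.List.pyGetD sub x 0) (PySem.List.pyGetD sub v 0) ≠ 0
        · rw [if_pos hprop, if_pos (by simpa [bne_iff_ne] using hprop), hstep x hx]
        · rw [if_neg hprop, if_neg (by simpa [bne_iff_ne] using hprop), hstep x hx]

theorem pvAttachAny {α : Type} (l : List α) (g : α → Bool) :
    l.attach.any (fun u => g u.1) = l.any g := by
  rw [Bool.eq_iff_iff, List.any_eq_true, List.any_eq_true]
  constructor
  · rintro ⟨u, _, h⟩; exact ⟨u.1, u.2, h⟩
  · rintro ⟨x, hx, h⟩; exact ⟨⟨x, hx⟩, List.mem_attach _ _, h⟩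

theorem rch_one (adj : Nat → Nat → Bool) (k u : Nat) : rch adj k 1 u = decide (u = 0) := by
  by_cases hu : u = 0
  · subst hu
    rw [rch]
    have : (1 : Nat).testBit 0 = true := by decide
    rw [dif_pos this, if_pos (by norm_num)]
    simp
  · rw [rch]
    have : (1 : Nat).testBit u = false := by
      rw [show (1 : Nat) = 2 ^ 0 from rfl, Nat.testBit_two_pow]
      simp [Ne.symm hu]
    rw [dif_neg (by simp [this])]
    simp [hu]

theorem hampathB_base (A : List (List Int)) (sub : List Int) (k : Nat) (v : Int)
    (hv0 : 0 < v) (hvk : v.toNat < k) :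
    hampathB A sub [] v = rch (adjSub A sub) k (maskOf [] ||| 2 ^ v.toNat ||| 1) v.toNat := by
  set t := v.toNat with ht
  have ht0 : t ≠ 0 := by omega
  have hvcast : ((t : Nat) : Int) = v := by omega
  have hm : maskOf [] ||| 2 ^ t ||| 1 = 2 ^ t ||| 1 := by simp [maskOf]
  rw [hampathB, if_pos rfl, hm]
  have hbt : (2 ^ t ||| 1).testBit t = true := by
    rw [Nat.testBit_or, Nat.testBit_two_pow_self]; rfl
  have h1t : (1 : Nat).testBit t = false := by
    rw [show (1 : Nat) = 2 ^ 0 from rfl, Nat.testBit_two_pow]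
    simp [Ne.symm ht0]
  have hne : 2 ^ t ||| 1 ≠ 2 ^ t := by
    intro hc
    have h0 : (2 ^ t ||| 1).testBit 0 = true := by
      rw [Nat.testBit_or]
      simp
    rw [hc, Nat.testBit_two_pow] at h0
    simp [ht0] at h0
  have hx : (2 ^ t ||| 1) ^^^ 2 ^ t = 1 := by
    apply Nat.eq_of_testBit_eq
    intro j
    rw [Nat.testBit_xor, Nat.testBit_or]
    by_cases hj : j = t
    · subst hj; simp [Nat.testBit_two_pow_self, h1t]
    · rw [Nat.testBit_two_pow]
      simp [Ne.symm hj]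
  rw [rch, dif_pos hbt, if_neg hne, hx]
  rw [Bool.eq_iff_iff, List.any_eq_true]
  constructor
  · intro h
    refine ⟨0, List.mem_range.mpr (by omega), ?_⟩
    rw [rch_one]
    have hadj : adjSub A sub 0 t = true := by
      rw [adjSub, hvcast]
      simpa using h
    simp [hadj]
  · rintro ⟨u, _, hu⟩
    rw [rch_one] at hu
    rw [Bool.and_eq_true] at hu
    obtain ⟨hu1, hu2⟩ := hu
    have hu0 : u = 0 := by simpa using hu2
    subst hu0
    rw [Bool.and_eq_true] at hu1
    obtain ⟨_, hadj⟩ := hu1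
    rw [adjSub, hvcast] at hadj
    simpa using hadj

theorem hampathB_eq (A : List (List Int)) (sub : List Int) (k : Nat) :
    ∀ (rest : List Int) (v : Int), rest.Nodup → (∀ x ∈ rest, 0 < x ∧ x.toNat < k) →
      0 < v → v.toNat < k → v ∉ rest →
      hampathB A sub rest v = rch (adjSub A sub) k (maskOf rest ||| 2 ^ v.toNat ||| 1) v.toNat := by
  suffices H : ∀ (N : Nat) (rest : List Int) (v : Int), rest.length ≤ N → rest.Nodup →
      (∀ x ∈ rest, 0 < x ∧ x.toNat < k) → 0 < v → v.toNat < k → v ∉ rest →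
      hampathB A sub rest v = rch (adjSub A sub) k (maskOf rest ||| 2 ^ v.toNat ||| 1) v.toNat by
    exact fun rest v h1 h2 h3 h4 h5 => H rest.length rest v le_rfl h1 h2 h3 h4 h5
  intro N
  induction N with
  | zero =>
    intro rest v hlen _ _ hv0 hvk _
    have hr : rest = [] := List.eq_nil_of_length_eq_zero (by omega)
    subst hr
    exact hampathB_base A sub k v hv0 hvk
  | succ N ih =>
    intro rest v hlen hnd helem hv0 hvk hvmem
    by_cases hr : rest = []
    · subst hr
      exact hampathB_base A sub k v hv0 hvk
    · have hnn : ∀ x ∈ rest, 0 ≤ x := fun x hx => (helem x hx).1.le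
      set t := v.toNat with ht
      have ht0 : t ≠ 0 := by omega
      have hvcast : ((t : Nat) : Int) = v := by omega
      set r : Nat := maskOf rest ||| 1 with hrdef
      have hmask0 : (maskOf rest).testBit 0 = false := by
        rw [maskOf_testBit rest hnn 0]
        have : (0 : Int) ∉ rest := fun hc => by have := (helem 0 hc).1; omega
        simp [this]
      have hmaskt : (maskOf rest).testBit t = false := by
        rw [maskOf_testBit rest hnn t, hvcast]
        simp [hvmem]
      have h1t : (1 : Nat).testBit t = false := by
        rw [show (1 : Nat) = 2 ^ 0 from rfl, Nat.testBit_two_pow]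
        simp [Ne.symm ht0]
      have hrbit : ∀ u : Nat, r.testBit u = ((maskOf rest).testBit u || decide (0 = u)) := by
        intro u
        rw [hrdef, Nat.testBit_or, show (1 : Nat) = 2 ^ 0 from rfl, Nat.testBit_two_pow]
      -- the big mask and its decomposition
      have hbm : (maskOf rest ||| 2 ^ t ||| 1).testBit t = true := by
        rw [Nat.testBit_or, Nat.testBit_or, Nat.testBit_two_pow_self]
        simp
      have hne : maskOf rest ||| 2 ^ t ||| 1 ≠ 2 ^ t := by
        intro hc
        have h0 : (maskOf rest ||| 2 ^ t ||| 1).testBit 0 = true := by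
          rw [Nat.testBit_or]
          simp
        rw [hc, Nat.testBit_two_pow] at h0
        simp [ht0] at h0
      have hx : (maskOf rest ||| 2 ^ t ||| 1) ^^^ 2 ^ t = r := by
        apply Nat.eq_of_testBit_eq
        intro j
        rw [Nat.testBit_xor, Nat.testBit_or, Nat.testBit_or, hrbit j,
          show (1 : Nat) = 2 ^ 0 from rfl, Nat.testBit_two_pow, Nat.testBit_two_pow]
        by_cases hj : j = t
        · subst hj
          simp [hmaskt, Ne.symm ht0]
        · simp [Ne.symm hj]
      -- rch r 0 is false
      have hrne1 : r ≠ 1 := by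
        obtain ⟨y, hy⟩ := List.exists_mem_of_ne_nil rest hr
        have hy0 : y.toNat ≠ 0 := by have := (helem y hy).1; omega
        intro hc
        have : r.testBit y.toNat = true := by
          rw [hrbit]
          rw [maskOf_nonneg_mem hnn hy]
          simp
        rw [hc] at this
        rw [show (1 : Nat) = 2 ^ 0 from rfl, Nat.testBit_two_pow] at this
        simp [Ne.symm hy0] at this
      have hr0 : rch (adjSub A sub) k r 0 = false := by
        rw [rch]
        by_cases hb : r.testBit 0 = true
        · rw [dif_pos hb, if_neg (by simpa using hrne1)]
          apply List.any_eq_false.mpr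
          intro u _
          have hxr : r ^^^ 2 ^ 0 = maskOf rest := by
            apply Nat.eq_of_testBit_eq
            intro j
            rw [Nat.testBit_xor, hrbit j, Nat.testBit_two_pow]
            by_cases hj : j = 0
            · subst hj; simp [hmask0]
            · simp [Ne.symm hj]
          rw [hxr]
          simp [rch_even (maskOf rest) u hmask0]
        · rw [dif_neg hb]
    -- LHS into a rest-indexed any
      rw [hampathB, if_neg hr]
      have hat : (rest.attach.any (fun u =>
          (agA A (PySem.List.pyGetD sub u.1 0) (PySem.List.pyGetD sub v 0) != 0) &&
            hampathB A sub (rest.filter (fun w => w != u.1)) u.1))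
          = rest.any (fun x =>
          (agA A (PySem.List.pyGetD sub x 0) (PySem.List.pyGetD sub v 0) != 0) &&
            hampathB A sub (rest.filter (fun w => w != x)) x) :=
        pvAttachAny rest (fun x =>
          (agA A (PySem.List.pyGetD sub x 0) (PySem.List.pyGetD sub v 0) != 0) &&
            hampathB A sub (rest.filter (fun w => w != x)) x)
      rw [hat]
      have hstep : ∀ x ∈ rest,
          hampathB A sub (rest.filter (fun w => w != x)) x
            = rch (adjSub A sub) k r x.toNat := by
        intro x hx
        have hflt : (rest.filter (fun w => w != x)).length < rest.length :=
          pv_filter_ne_length_lt hx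
        have hxnotmem : x ∉ rest.filter (fun w => w != x) := by
          intro hc
          have := List.mem_filter.mp hc
          simp at this
        have hrec := ih (rest.filter (fun w => w != x)) x (by omega)
          (List.Nodup.filter _ hnd)
          (fun z hz => helem z (List.mem_of_mem_filter hz))
          (helem x hx).1 (helem x hx).2 hxnotmem
        rw [hrec, maskOf_filter rest hnn x hx]
      have hadj : ∀ x ∈ rest,
          adjSub A sub x.toNat t
            = (agA A (PySem.List.pyGetD sub x 0) (PySem.List.pyGetD sub v 0) != 0) := by
        intro x hx
        have hxc : ((x.toNat : Nat) : Int) = x := by have := hnn x hx; omega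
        rw [adjSub, hxc, hvcast]
      rw [rch, dif_pos hbm, if_neg hne, hx]
      rw [Bool.eq_iff_iff, List.any_eq_true, List.any_eq_true]
      constructor
      · rintro ⟨x, hxm, hand⟩
        rw [Bool.and_eq_true] at hand
        obtain ⟨he, hh⟩ := hand
        refine ⟨x.toNat, List.mem_range.mpr (helem x hxm).2, ?_⟩
        rw [Bool.and_eq_true, Bool.and_eq_true]
        refine ⟨⟨?_, ?_⟩, ?_⟩
        · rw [hrbit, maskOf_nonneg_mem hnn hxm]
          simp
        · rw [hadj x hxm]; exact he
        · rw [← hstep x hxm]; exact hh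
      · rintro ⟨u, humem, hand⟩
        rw [Bool.and_eq_true] at hand
        obtain ⟨hand1, hrch⟩ := hand
        rw [Bool.and_eq_true] at hand1
        obtain ⟨hbit, hadju⟩ := hand1
        have hu0 : u ≠ 0 := by
          intro hc
          subst hc
          rw [hr0] at hrch
          cases hrch
        have humask : (maskOf rest).testBit u = true := by
          rw [hrbit] at hbit
          simpa [Ne.symm hu0] using hbit
        rcases List.mem_map.mp ((pvRestMaskBit hnn u).mp humask) with ⟨x, hxm, rfl⟩
        refine ⟨x, hxm, ?_⟩
        rw [Bool.and_eq_true]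
        constructor
        · rw [← hadj x hxm]; exact hadju
        · rw [hstep x hxm]; exact hrch

-- ---- A-side: the dict-of-dict count/sign DP computes gsp ----

def VD (d : PySem.Dict Int (PySem.Dict Int Int)) (m v : Int) : Int :=
  (d.getD m PySem.Dict.empty).getD v 0

def adjA (Mx : List (List Int)) (u w : Nat) : Bool := agA Mx (u : Int) (w : Int) != 0

theorem VD_setA (d : PySem.Dict Int (PySem.Dict Int Int)) (m u w m' u' : Int) :
    VD (setA d m u w) m' u' = if m' = m ∧ u' = u then w else VD d m' u' := by
  unfold setA VD
  rw [PySem.Dict.getD_insert]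
  by_cases h1 : m' = m
  · rw [if_pos h1, PySem.Dict.getD_insert]
    by_cases h2 : u' = u
    · simp [h1, h2]
    · simp [h1, h2]
  · rw [if_neg h1, if_neg (by tauto)]

theorem VD_bump (d : PySem.Dict Int (PySem.Dict Int Int)) (m u δ m' u' : Int) :
    VD (bumpA d m u δ) m' u' = VD d m' u' + (if m' = m ∧ u' = u then δ else 0) := by
  unfold bumpA VD
  rw [PySem.Dict.getD_insert]
  by_cases h1 : m' = m
  · rw [if_pos h1, PySem.Dict.getD_insert]
    by_cases h2 : u' = u
    · simp [h1, h2]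
    · simp [h1, h2]
  · rw [if_neg h1, if_neg (by tauto)]
    simp

theorem VD_stepU (A : List (List Int)) (v c s mask : Int) (st : pvSt) (u m' u' : Int) :
    VD (stepUA A v c s mask st u).1 m' u' = VD st.1 m' u' +
      (if PySem.Int.band mask ((1 : Int) <<< u.toNat) = 0 ∧
          m' = PySem.Int.bor mask ((1 : Int) <<< u.toNat) ∧ u' = u ∧ agA A v u ≠ 0 then c else 0)
    ∧ VD (stepUA A v c s mask st u).2 m' u' = VD st.2 m' u' +
      (if PySem.Int.band mask ((1 : Int) <<< u.toNat) = 0 ∧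
          m' = PySem.Int.bor mask ((1 : Int) <<< u.toNat) ∧ u' = u then
        (if agA A v u ≠ 0 then s else -s) else 0) := by
  unfold stepUA
  by_cases hb : PySem.Int.band mask ((1 : Int) <<< u.toNat) ≠ 0
  · rw [if_pos hb]
    constructor <;> · rw [if_neg (by tauto)]; ring
  · rw [if_neg hb]
    push_neg at hb
    by_cases he : agA A v u ≠ 0
    · rw [if_pos he]
      constructor
      · show VD (bumpA st.1 _ u c) m' u' = _
        rw [VD_bump]
        by_cases hmu : m' = PySem.Int.bor mask ((1 : Int) <<< u.toNat) ∧ u' = u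
        · rw [if_pos hmu, if_pos ⟨hb, hmu.1, hmu.2, he⟩]
        · rw [if_neg hmu, if_neg (by tauto)]
      · show VD (bumpA st.2 _ u s) m' u' = _
        rw [VD_bump]
        by_cases hmu : m' = PySem.Int.bor mask ((1 : Int) <<< u.toNat) ∧ u' = u
        · rw [if_pos hmu, if_pos ⟨hb, hmu.1, hmu.2⟩, if_pos he]
        · rw [if_neg hmu, if_neg (by tauto)]
    · rw [if_neg he]
      constructor
      · show VD st.1 m' u' = _
        rw [if_neg (by tauto)]; ring
      · show VD (bumpA st.2 _ u (-s)) m' u' = _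
        rw [VD_bump]
        by_cases hmu : m' = PySem.Int.bor mask ((1 : Int) <<< u.toNat) ∧ u' = u
        · rw [if_pos hmu, if_pos ⟨hb, hmu.1, hmu.2⟩, if_neg he]
        · rw [if_neg hmu, if_neg (by tauto)]

theorem VD_uloop (A : List (List Int)) (v c s mask : Int) :
    ∀ (L : List Int), L.Nodup → ∀ (st : pvSt) (m' u' : Int),
    VD (L.foldl (stepUA A v c s mask) st).1 m' u' = VD st.1 m' u' +
      (if u' ∈ L ∧ PySem.Int.band mask ((1 : Int) <<< u'.toNat) = 0 ∧
          m' = PySem.Int.bor mask ((1 : Int) <<< u'.toNat) ∧ agA A v u' ≠ 0 then c else 0)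
    ∧ VD (L.foldl (stepUA A v c s mask) st).2 m' u' = VD st.2 m' u' +
      (if u' ∈ L ∧ PySem.Int.band mask ((1 : Int) <<< u'.toNat) = 0 ∧
          m' = PySem.Int.bor mask ((1 : Int) <<< u'.toNat) then
        (if agA A v u' ≠ 0 then s else -s) else 0) := by
  intro L
  induction L with
  | nil =>
    intro _ st m' u'
    constructor <;> simp
  | cons x xs ih =>
    intro hnd st m' u'
    rcases List.nodup_cons.mp hnd with ⟨hx, hxs⟩
    rw [List.foldl_cons]
    obtain ⟨ihc, ihs⟩ := ih hxs (stepUA A v c s mask st x) m' u'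
    obtain ⟨sc, ss⟩ := VD_stepU A v c s mask st x m' u'
    rw [ihc, ihs, sc, ss]
    constructor <;>
    · by_cases h5 : u' = x
      · subst h5
        have h1 : u' ∉ xs := hx
        by_cases h2 : PySem.Int.band mask ((1 : Int) <<< u'.toNat) = 0 <;>
          by_cases h3 : m' = PySem.Int.bor mask ((1 : Int) <<< u'.toNat) <;>
            by_cases h4 : agA A v u' ≠ 0 <;>
              simp [h1, h2, h3, h4, List.mem_cons] <;> ring
      · by_cases h1 : u' ∈ xs <;>
          by_cases h2 : PySem.Int.band mask ((1 : Int) <<< u'.toNat) = 0 <;>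
            by_cases h3 : m' = PySem.Int.bor mask ((1 : Int) <<< u'.toNat) <;>
              by_cases h4 : agA A v u' ≠ 0 <;>
                simp [h1, h2, h3, h4, h5, List.mem_cons] <;> ring

def CCc (A : List (List Int)) (n mask : Int) (st : pvSt) (v m' u' : Int) : Int :=
  if u' ∈ PySem.List.pyRange 0 n ∧ PySem.Int.band mask ((1 : Int) <<< u'.toNat) = 0 ∧
      m' = PySem.Int.bor mask ((1 : Int) <<< u'.toNat) ∧ agA A v u' ≠ 0 then
    VD st.1 mask v else 0

def CSc (A : List (List Int)) (n mask : Int) (st : pvSt) (v m' u' : Int) : Int :=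
  if u' ∈ PySem.List.pyRange 0 n ∧ PySem.Int.band mask ((1 : Int) <<< u'.toNat) = 0 ∧
      m' = PySem.Int.bor mask ((1 : Int) <<< u'.toNat) then
    (if agA A v u' ≠ 0 then VD st.2 mask v else -(VD st.2 mask v)) else 0

theorem VD_vstep (A : List (List Int)) (n mask : Int) (st : pvSt) (v m' u' : Int) :
    VD (stepVA A n mask st v).1 m' u' = VD st.1 m' u' + CCc A n mask st v m' u'
    ∧ VD (stepVA A n mask st v).2 m' u' = VD st.2 m' u' + CSc A n mask st v m' u' := by
  unfold stepVA CCc CSc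
  by_cases h0 : (st.1.getD mask PySem.Dict.empty).getD v 0 = 0 ∧
      (st.2.getD mask PySem.Dict.empty).getD v 0 = 0
  · rw [if_pos h0]
    have h1 : VD st.1 mask v = 0 := h0.1
    have h2 : VD st.2 mask v = 0 := h0.2
    constructor
    · rw [h1]
      by_cases hcond : u' ∈ PySem.List.pyRange 0 n ∧
          PySem.Int.band mask ((1 : Int) <<< u'.toNat) = 0 ∧
          m' = PySem.Int.bor mask ((1 : Int) <<< u'.toNat) ∧ agA A v u' ≠ 0
      · rw [if_pos hcond]; ring
      · rw [if_neg hcond]; ring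
    · rw [h2]
      by_cases hcond : u' ∈ PySem.List.pyRange 0 n ∧
          PySem.Int.band mask ((1 : Int) <<< u'.toNat) = 0 ∧
          m' = PySem.Int.bor mask ((1 : Int) <<< u'.toNat)
      · rw [if_pos hcond]
        by_cases he : agA A v u' ≠ 0 <;> simp [he]
      · rw [if_neg hcond]; ring
  · rw [if_neg h0]
    exact VD_uloop A v _ _ mask (PySem.List.pyRange 0 n) (pvRangeNodup n) st m' u'

theorem VD_vstep_row (A : List (List Int)) (n mask : Int) (hmask : 0 ≤ mask)
    (st : pvSt) (v w : Int) :
    VD (stepVA A n mask st v).1 mask w = VD st.1 mask w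
    ∧ VD (stepVA A n mask st v).2 mask w = VD st.2 mask w := by
  obtain ⟨h1, h2⟩ := VD_vstep A n mask st v mask w
  have hC : CCc A n mask st v mask w = 0 := by
    unfold CCc
    rw [if_neg]
    rintro ⟨_, hb0, hbor, _⟩
    exact pvBorNe mask hmask w.toNat ((pvBandPow mask hmask w.toNat).mp hb0) hbor.symm
  have hS : CSc A n mask st v mask w = 0 := by
    unfold CSc
    rw [if_neg]
    rintro ⟨_, hb0, hbor⟩
    exact pvBorNe mask hmask w.toNat ((pvBandPow mask hmask w.toNat).mp hb0) hbor.symm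
  rw [h1, h2, hC, hS, add_zero, add_zero]
  exact ⟨rfl, rfl⟩

theorem VD_vloop (A : List (List Int)) (n mask : Int) (hmask : 0 ≤ mask) :
    ∀ (L : List Int) (st : pvSt) (m' u' : Int),
    VD (L.foldl (stepVA A n mask) st).1 m' u' =
      VD st.1 m' u' + (L.map (fun v => CCc A n mask st v m' u')).sum
    ∧ VD (L.foldl (stepVA A n mask) st).2 m' u' =
      VD st.2 m' u' + (L.map (fun v => CSc A n mask st v m' u')).sum := by
  intro L
  induction L with
  | nil => intro st m' u'; constructor <;> simp
  | cons v0 vs ih =>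
    intro st m' u'
    rw [List.foldl_cons]
    obtain ⟨ihc, ihs⟩ := ih (stepVA A n mask st v0) m' u'
    obtain ⟨sc, ss⟩ := VD_vstep A n mask st v0 m' u'
    have hmapc : (vs.map (fun v => CCc A n mask (stepVA A n mask st v0) v m' u'))
        = vs.map (fun v => CCc A n mask st v m' u') := by
      apply List.map_congr_left
      intro v _
      unfold CCc
      rw [(VD_vstep_row A n mask hmask st v0 v).1]
    have hmaps : (vs.map (fun v => CSc A n mask (stepVA A n mask st v0) v m' u'))
        = vs.map (fun v => CSc A n mask st v m' u') := by
      apply List.map_congr_left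
      intro v _
      unfold CSc
      rw [(VD_vstep_row A n mask hmask st v0 v).2]
    rw [ihc, ihs, hmapc, hmaps, sc, ss]
    constructor <;> · rw [List.map_cons, List.sum_cons]; ring

def dmid (adj : Nat → Nat → Bool) (k M : Nat) (m v : Int) : Int × Int :=
  if 0 ≤ m ∧ 0 ≤ v ∧ v.toNat < k ∧ m.toNat < 2 ^ k then
    (if m.toNat = 2 ^ v.toNat then (1, 1)
     else if m.toNat.testBit v.toNat = true ∧ 0 < m.toNat ^^^ 2 ^ v.toNat ∧
         m.toNat ^^^ 2 ^ v.toNat < M then gsp adj k m.toNat v.toNat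
     else (0, 0))
  else (0, 0)

def InvC (A : List (List Int)) (n : Int) (st : pvSt) (M : Nat) : Prop :=
  ∀ m v : Int, VD st.1 m v = (dmid (adjA A) n.toNat M m v).1
    ∧ VD st.2 m v = (dmid (adjA A) n.toNat M m v).2

theorem VD_initStep (st : pvSt) (x m v : Int) :
    VD (initStep st x).1 m v = (if m = (1 : Int) <<< x.toNat ∧ v = x then 1 else VD st.1 m v)
    ∧ VD (initStep st x).2 m v = (if m = (1 : Int) <<< x.toNat ∧ v = x then 1 else VD st.2 m v) := by
  unfold initStep
  constructor
  · show VD (setA st.1 ((1 : Int) <<< x.toNat) x 1) m v = _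
    rw [VD_setA]
  · show VD (setA st.2 ((1 : Int) <<< x.toNat) x 1) m v = _
    rw [VD_setA]

theorem VD_initA (n : Int) (m v : Int) :
    VD (initA n).1 m v = (if v ∈ PySem.List.pyRange 0 n ∧ m = (1 : Int) <<< v.toNat then 1 else 0)
    ∧ VD (initA n).2 m v = (if v ∈ PySem.List.pyRange 0 n ∧ m = (1 : Int) <<< v.toNat then 1 else 0) := by
  have H : ∀ (L : List Int) (st : pvSt),
      VD (L.foldl initStep st).1 m v
        = (if v ∈ L ∧ m = (1 : Int) <<< v.toNat then 1 else VD st.1 m v)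
      ∧ VD (L.foldl initStep st).2 m v
        = (if v ∈ L ∧ m = (1 : Int) <<< v.toNat then 1 else VD st.2 m v) := by
    intro L
    induction L with
    | nil => intro st; constructor <;> simp
    | cons x xs ih =>
      intro st
      rw [List.foldl_cons]
      obtain ⟨ihc, ihs⟩ := ih (initStep st x)
      obtain ⟨sc, ss⟩ := VD_initStep st x m v
      rw [ihc, ihs, sc, ss]
      constructor <;>
      · by_cases h5 : v = x
        · subst h5
          by_cases hm : m = (1 : Int) <<< v.toNat <;>
            by_cases hvxs : v ∈ xs <;>
              simp [hm, hvxs, List.mem_cons]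
        · by_cases hvxs : v ∈ xs <;>
            by_cases hm : m = (1 : Int) <<< v.toNat <;>
              simp [hm, hvxs, h5, List.mem_cons]
  obtain ⟨h1, h2⟩ := H (PySem.List.pyRange 0 n) (PySem.Dict.empty, PySem.Dict.empty)
  have hz : VD (PySem.Dict.empty : PySem.Dict Int (PySem.Dict Int Int)) m v = 0 := by
    unfold VD
    rw [PySem.Dict.getD_empty, PySem.Dict.getD_empty]
  unfold initA
  rw [h1, h2]
  constructor <;>
  · by_cases hc : v ∈ PySem.List.pyRange 0 n ∧ m = (1 : Int) <<< v.toNat <;> simp [hc, hz]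

theorem InvC_init (A : List (List Int)) (n : Int) (M : Nat) (hM : M ≤ 1) :
    InvC A n (initA n) M := by
  intro m v
  obtain ⟨h1, h2⟩ := VD_initA n m v
  rw [h1, h2]
  unfold dmid
  by_cases hc : v ∈ PySem.List.pyRange 0 n ∧ m = (1 : Int) <<< v.toNat
  · obtain ⟨hv, hm⟩ := hc
    have hv' := pvMemRange0.mp hv
    have hvk : v.toNat < n.toNat := by omega
    have h0m : 0 ≤ m := by rw [hm]; exact pvShiftNonneg _
    have hmt : m.toNat = 2 ^ v.toNat := by rw [hm, pvShift1, Int.toNat_natCast]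
    have hmk : m.toNat < 2 ^ n.toNat := by
      rw [hmt]; exact Nat.pow_lt_pow_right one_lt_two hvk
    rw [if_pos ⟨hv, hm⟩, if_pos ⟨h0m, hv'.1, hvk, hmk⟩, if_pos hmt]
    exact ⟨rfl, rfl⟩
  · rw [if_neg hc]
    by_cases hout : 0 ≤ m ∧ 0 ≤ v ∧ v.toNat < n.toNat ∧ m.toNat < 2 ^ n.toNat
    · rw [if_pos hout]
      have hnot1 : ¬(m.toNat = 2 ^ v.toNat) := by
        intro he
        apply hc
        constructor
        · exact pvMemRange0.mpr ⟨hout.2.1, by omega⟩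
        · rw [pvShift1]; omega
      have hnot2 : ¬(m.toNat.testBit v.toNat = true ∧ 0 < m.toNat ^^^ 2 ^ v.toNat ∧
          m.toNat ^^^ 2 ^ v.toNat < M) := by
        rintro ⟨_, hx1, hx2⟩; omega
      rw [if_neg hnot1, if_neg hnot2]
      exact ⟨rfl, rfl⟩
    · rw [if_neg hout]
      exact ⟨rfl, rfl⟩

theorem dmid_row (adj : Nat → Nat → Bool) (k M : Nat) (h1 : 1 ≤ M) (h2 : M < 2 ^ k)
    (v : Int) (h0v : 0 ≤ v) (hvk : v.toNat < k) :
    dmid adj k M ((M : Nat) : Int) v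
      = (if M.testBit v.toNat = true then gsp adj k M v.toNat else (0, 0)) := by
  unfold dmid
  rw [if_pos ⟨by positivity, h0v, hvk, by rw [Int.toNat_natCast]; exact h2⟩]
  simp only [Int.toNat_natCast]
  by_cases he : M = 2 ^ v.toNat
  · have hb : M.testBit v.toNat = true := by rw [he]; exact Nat.testBit_two_pow_self
    rw [if_pos he, if_pos hb]
    conv_rhs => rw [gsp]
    rw [dif_pos hb, if_pos he]
  · rw [if_neg he]
    by_cases hb : M.testBit v.toNat = true
    · have hgate : M.testBit v.toNat = true ∧ 0 < M ^^^ 2 ^ v.toNat ∧ M ^^^ 2 ^ v.toNat < M :=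
        ⟨hb, Nat.pos_of_ne_zero (fun h0 => he (Nat.xor_eq_zero.mp h0)), pvXorLt hb⟩
      rw [if_pos hgate, if_pos hb]
    · rw [if_neg (by tauto), if_neg hb]

theorem InvC_step (A : List (List Int)) (n : Int) (M : Nat) (h1 : 1 ≤ M) (h2 : M < 2 ^ n.toNat)
    (st : pvSt) (hInv : InvC A n st M) :
    InvC A n ((PySem.List.pyRange 0 n).foldl (stepVA A n ((M : Nat) : Int)) st) (M + 1) := by
  intro m' v'
  have hmi0 : (0 : Int) ≤ ((M : Nat) : Int) := by positivity
  have hmiN : (((M : Nat) : Int)).toNat = M := Int.toNat_natCast M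
  have hband : ∀ t : Nat, (PySem.Int.band ((M : Nat) : Int) ((1 : Int) <<< t) = 0)
      ↔ M.testBit t = false := by
    intro t
    rw [pvBandPow _ hmi0 t, hmiN]
  have hborM : ∀ t : Nat, PySem.Int.bor ((M : Nat) : Int) ((1 : Int) <<< t)
      = ((M ||| 2 ^ t : Nat) : Int) := by
    intro t
    rw [pvBorPow _ hmi0 t, hmiN]
  obtain ⟨hc, hs⟩ := VD_vloop A n ((M : Nat) : Int) hmi0 (PySem.List.pyRange 0 n) st m' v'
  rw [hc, hs, (hInv m' v').1, (hInv m' v').2]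
  by_cases hSC : v' ∈ PySem.List.pyRange 0 n ∧
      PySem.Int.band ((M : Nat) : Int) ((1 : Int) <<< v'.toNat) = 0 ∧
      m' = PySem.Int.bor ((M : Nat) : Int) ((1 : Int) <<< v'.toNat)
  · obtain ⟨hvmem, hband', hbor'⟩ := hSC
    obtain ⟨hv0, hvn⟩ := pvMemRange0.mp hvmem
    have htk : v'.toNat < n.toNat := by omega
    have hMbit : M.testBit v'.toNat = false := (hband v'.toNat).mp hband'
    have hm' : m' = ((M ||| 2 ^ v'.toNat : Nat) : Int) := by rw [hbor', hborM]
    have hm'toNat : m'.toNat = M ||| 2 ^ v'.toNat := by rw [hm', Int.toNat_natCast]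
    have hm'0 : 0 ≤ m' := by rw [hm']; positivity
    have hlt : M ||| 2 ^ v'.toNat < 2 ^ n.toNat :=
      Nat.or_lt_two_pow h2 (Nat.pow_lt_pow_right one_lt_two htk)
    have hbit' : (M ||| 2 ^ v'.toNat).testBit v'.toNat = true := by
      rw [Nat.testBit_or, Nat.testBit_two_pow_self, Bool.or_true]
    have hMne : M ||| 2 ^ v'.toNat ≠ 2 ^ v'.toNat := pvOrPowNe M v'.toNat h1 hMbit
    have hxor : (M ||| 2 ^ v'.toNat) ^^^ 2 ^ v'.toNat = M := pvOrXor M v'.toNat hMbit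
    have hvcast : ((v'.toNat : Nat) : Int) = v' := by omega
    have hnew : dmid (adjA A) n.toNat (M + 1) m' v'
        = gsp (adjA A) n.toNat (M ||| 2 ^ v'.toNat) v'.toNat := by
      unfold dmid
      rw [if_pos ⟨hm'0, hv0, htk, by rw [hm'toNat]; exact hlt⟩]
      simp only [hm'toNat]
      rw [if_neg hMne, if_pos ⟨hbit', by rw [hxor]; omega, by rw [hxor]; omega⟩]
    have hold : dmid (adjA A) n.toNat M m' v' = (0, 0) := by
      unfold dmid
      rw [if_pos ⟨hm'0, hv0, htk, by rw [hm'toNat]; exact hlt⟩]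
      simp only [hm'toNat]
      rw [if_neg hMne, if_neg (by rintro ⟨_, _, hlt'⟩; rw [hxor] at hlt'; omega)]
    rw [hnew, hold]
    rw [gsp_eq _ _ _ _ hbit' hMne, hxor]
    have hrow : ∀ v : Int, v ∈ PySem.List.pyRange 0 n →
        (VD st.1 ((M : Nat) : Int) v = (if M.testBit v.toNat = true
            then (gsp (adjA A) n.toNat M v.toNat).1 else 0))
        ∧ (VD st.2 ((M : Nat) : Int) v = (if M.testBit v.toNat = true
            then (gsp (adjA A) n.toNat M v.toNat).2 else 0)) := by
      intro v hv
      obtain ⟨h0v, hvn'⟩ := pvMemRange0.mp hv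
      have h := hInv ((M : Nat) : Int) v
      rw [dmid_row (adjA A) n.toNat M h1 h2 v h0v (by omega)] at h
      obtain ⟨ha, hb⟩ := h
      constructor
      · rw [ha]; by_cases hbt : M.testBit v.toNat = true <;> simp [hbt]
      · rw [hb]; by_cases hbt : M.testBit v.toNat = true <;> simp [hbt]
    constructor
    · dsimp only
      rw [zero_add]
      rw [show ((PySem.List.pyRange 0 n).map (fun v => CCc A n ((M : Nat) : Int) st v m' v'))
          = (PySem.List.pyRange 0 n).map (fun v =>
              if agA A v v' ≠ 0 then
                (if M.testBit v.toNat = true then (gsp (adjA A) n.toNat M v.toNat).1 else 0)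
              else 0) from
        List.map_congr_left (fun v hv => by
          unfold CCc
          by_cases hedge : agA A v v' ≠ 0
          · rw [if_pos ⟨hvmem, hband', hbor', hedge⟩, if_pos hedge, (hrow v hv).1]
          · rw [if_neg (by tauto), if_neg hedge])]
      rw [pvRange0 n, List.map_map]
      congr 1
      apply List.map_congr_left
      intro u hu
      have hadj : adjA A u v'.toNat = (agA A (u : Int) v' != 0) := by
        rw [adjA, hvcast]
      simp only [Function.comp, Int.toNat_natCast]
      by_cases hedge : agA A (u : Int) v' ≠ 0 <;>
        by_cases hbt : M.testBit u = true <;>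
          simp [hedge, hbt, hadj, bne_iff_ne]
    · dsimp only
      rw [zero_add]
      rw [show ((PySem.List.pyRange 0 n).map (fun v => CSc A n ((M : Nat) : Int) st v m' v'))
          = (PySem.List.pyRange 0 n).map (fun v =>
              if agA A v v' ≠ 0 then
                (if M.testBit v.toNat = true then (gsp (adjA A) n.toNat M v.toNat).2 else 0)
              else -(if M.testBit v.toNat = true then (gsp (adjA A) n.toNat M v.toNat).2 else 0)) from
        List.map_congr_left (fun v hv => by
          unfold CSc
          rw [if_pos ⟨hvmem, hband', hbor'⟩, (hrow v hv).2])]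
      rw [pvRange0 n, List.map_map]
      congr 1
      apply List.map_congr_left
      intro u hu
      have hadj : adjA A u v'.toNat = (agA A (u : Int) v' != 0) := by
        rw [adjA, hvcast]
      simp only [Function.comp, Int.toNat_natCast]
      by_cases hedge : agA A (u : Int) v' ≠ 0 <;>
        by_cases hbt : M.testBit u = true <;>
          simp [hedge, hbt, hadj, bne_iff_ne]
  · -- no contribution to (m', v'): every summand is 0 and the gate cannot change
    have hzc : ((PySem.List.pyRange 0 n).map
        (fun v => CCc A n ((M : Nat) : Int) st v m' v')).sum = 0 := by
      apply List.sum_eq_zero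
      intro x hx
      rcases List.mem_map.mp hx with ⟨v, _, rfl⟩
      unfold CCc
      rw [if_neg]
      rintro ⟨ha, hb, hcnd, _⟩
      exact hSC ⟨ha, hb, hcnd⟩
    have hzs : ((PySem.List.pyRange 0 n).map
        (fun v => CSc A n ((M : Nat) : Int) st v m' v')).sum = 0 := by
      apply List.sum_eq_zero
      intro x hx
      rcases List.mem_map.mp hx with ⟨v, _, rfl⟩
      unfold CSc
      rw [if_neg]
      rintro ⟨ha, hb, hcnd⟩
      exact hSC ⟨ha, hb, hcnd⟩
    have hsame : dmid (adjA A) n.toNat (M + 1) m' v' = dmid (adjA A) n.toNat M m' v' := by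
      unfold dmid
      by_cases hout : 0 ≤ m' ∧ 0 ≤ v' ∧ v'.toNat < n.toNat ∧ m'.toNat < 2 ^ n.toNat
      · rw [if_pos hout, if_pos hout]
        by_cases hfst : m'.toNat = 2 ^ v'.toNat
        · rw [if_pos hfst, if_pos hfst]
        · rw [if_neg hfst, if_neg hfst]
          have hneM : ¬(m'.toNat.testBit v'.toNat = true ∧ m'.toNat ^^^ 2 ^ v'.toNat = M) := by
            rintro ⟨hbit, hxeq⟩
            apply hSC
            have hMbit : M.testBit v'.toNat = false := by
              rw [← hxeq]; exact pvXorNoBit hbit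
            have hm'eq : M ||| 2 ^ v'.toNat = m'.toNat := by
              rw [← hxeq]; exact pvXorRecover hbit
            refine ⟨?_, ?_, ?_⟩
            · exact pvMemRange0.mpr ⟨hout.2.1, by omega⟩
            · exact (hband v'.toNat).mpr hMbit
            · rw [hborM v'.toNat, hm'eq]; omega
          apply if_congr _ rfl rfl
          constructor
          · rintro ⟨hb, hp, hl⟩
            refine ⟨hb, hp, ?_⟩
            rcases Nat.lt_succ_iff_lt_or_eq.mp hl with h | h
            · exact h
            · exact absurd ⟨hb, h⟩ hneM
          · rintro ⟨hb, hp, hl⟩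
            exact ⟨hb, hp, by omega⟩
      · rw [if_neg hout, if_neg hout]
    rw [hzc, hzs, hsame, add_zero, add_zero]
    exact ⟨rfl, rfl⟩

theorem InvC_loop (A : List (List Int)) (n : Int) : InvC A n (dpA A n) (2 ^ n.toNat) := by
  have H : ∀ M : Nat, M ≤ 2 ^ n.toNat →
      InvC A n ((PySem.List.pyRange 1 ((M : Nat) : Int)).foldl
        (fun st mask => (PySem.List.pyRange 0 n).foldl (stepVA A n mask) st) (initA n)) M := by
    intro M
    induction M with
    | zero =>
      intro _
      rw [show (((0 : Nat) : Int)) = (0 : Int) by norm_num, pvRangeNil (a := 1) (b := 0) (by norm_num)]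
      exact InvC_init A n 0 (by omega)
    | succ M ih =>
      intro hle
      by_cases hM : M = 0
      · subst hM
        rw [show (((0 + 1 : Nat) : Int)) = (1 : Int) by norm_num, pvRangeNil (a := 1) (b := 1) (by norm_num)]
        exact InvC_init A n 1 le_rfl
      · have h1 : 1 ≤ M := by omega
        rw [show (((M + 1 : Nat)) : Int) = ((M : Nat) : Int) + 1 by push_cast; ring,
          PySem.List.pyRange_one_succ_right (by exact_mod_cast h1), List.foldl_append]
        simp only [List.foldl_cons, List.foldl_nil]
        exact InvC_step A n M h1 (by omega) _ (ih (by omega))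
  have h2 := H (2 ^ n.toNat) le_rfl
  unfold dpA
  rw [show ((1 : Int) <<< n.toNat) = ((2 ^ n.toNat : Nat) : Int) from pvShift1 n.toNat]
  exact h2

theorem countDP_final (A : List (List Int)) (n : Int) :
    sumRowA (dpA A n).1 ((1 : Int) <<< n.toNat - 1) n
      = ((PySem.List.pyRange 0 n).map
          (fun v => (gsp (adjA A) n.toNat (2 ^ n.toNat - 1) v.toNat).1)).sum
    ∧ sumRowA (dpA A n).2 ((1 : Int) <<< n.toNat - 1) n
      = ((PySem.List.pyRange 0 n).map
          (fun v => (gsp (adjA A) n.toNat (2 ^ n.toNat - 1) v.toNat).2)).sum := by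
  have h1p : 1 ≤ 2 ^ n.toNat := Nat.one_le_two_pow
  have hful : ((1 : Int) <<< n.toNat - 1) = ((2 ^ n.toNat - 1 : Nat) : Int) := by
    rw [pvShift1]
    push_cast [h1p]
    ring
  have hloop := InvC_loop A n
  have hfull : ∀ v : Int, v ∈ PySem.List.pyRange 0 n →
      dmid (adjA A) n.toNat (2 ^ n.toNat) ((2 ^ n.toNat - 1 : Nat) : Int) v
        = gsp (adjA A) n.toNat (2 ^ n.toNat - 1) v.toNat := by
    intro v hv
    obtain ⟨h0v, hvn⟩ := pvMemRange0.mp hv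
    have hvk : v.toNat < n.toNat := by omega
    have hb : (2 ^ n.toNat - 1).testBit v.toNat = true := by
      rw [Nat.testBit_two_pow_sub_one]; simp [hvk]
    unfold dmid
    rw [if_pos ⟨by positivity, h0v, hvk, by rw [Int.toNat_natCast]; omega⟩]
    simp only [Int.toNat_natCast]
    by_cases he : 2 ^ n.toNat - 1 = 2 ^ v.toNat
    · rw [if_pos he]
      conv_rhs => rw [gsp]
      rw [dif_pos hb, if_pos he]
    · rw [if_neg he]
      rw [if_pos ⟨hb, Nat.pos_of_ne_zero (fun h0 => he (Nat.xor_eq_zero.mp h0)),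
        lt_of_lt_of_le (pvXorLt hb) (by omega)⟩]
  constructor
  · unfold sumRowA
    rw [PySem.List.foldl_add, zero_add]
    apply congrArg List.sum
    apply List.map_congr_left
    intro v hv
    have h := (hloop ((2 ^ n.toNat - 1 : Nat) : Int) v).1
    unfold VD at h
    rw [hful, h, hfull v hv]
  · unfold sumRowA
    rw [PySem.List.foldl_add, zero_add]
    apply congrArg List.sum
    apply List.map_congr_left
    intro v hv
    have h := (hloop ((2 ^ n.toNat - 1 : Nat) : Int) v).2
    unfold VD at h
    rw [hful, h, hfull v hv]

-- B's H/alt accumulation equals the same sums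
theorem altB_final (A : List (List Int)) (n : Int) :
    ((PySem.List.pyRange 0 n).foldl (fun (p : Int × Int) v =>
        (p.1 + (pathsB A (PySem.List.pyRange 0 n)
            ((PySem.List.pyRange 0 n).filter (fun u => u != v)) v).1,
         p.2 + (pathsB A (PySem.List.pyRange 0 n)
            ((PySem.List.pyRange 0 n).filter (fun u => u != v)) v).2)) (0, 0))
      = (((PySem.List.pyRange 0 n).map
            (fun v => (gsp (adjA A) n.toNat (2 ^ n.toNat - 1) v.toNat).1)).sum,
         ((PySem.List.pyRange 0 n).map
            (fun v => (gsp (adjA A) n.toNat (2 ^ n.toNat - 1) v.toNat).2)).sum) := by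
  rw [PySem.List.foldl_prod_mk
    (f := fun a v => a + (pathsB A (PySem.List.pyRange 0 n)
      ((PySem.List.pyRange 0 n).filter (fun u => u != v)) v).1)
    (g := fun a v => a + (pathsB A (PySem.List.pyRange 0 n)
      ((PySem.List.pyRange 0 n).filter (fun u => u != v)) v).2)]
  have hpaths : ∀ v ∈ PySem.List.pyRange 0 n,
      pathsB A (PySem.List.pyRange 0 n) ((PySem.List.pyRange 0 n).filter (fun u => u != v)) v
        = gsp (adjSub A (PySem.List.pyRange 0 n)) n.toNat (2 ^ n.toNat - 1) v.toNat := by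
    intro v hv
    obtain ⟨h0v, hvn⟩ := pvMemRange0.mp hv
    have hrest : ∀ x ∈ (PySem.List.pyRange 0 n).filter (fun u => u != v), 0 ≤ x ∧ x.toNat < n.toNat := by
      intro x hx
      have hx' := pvMemRange0.mp (List.mem_of_mem_filter hx)
      exact ⟨hx'.1, by omega⟩
    have hmask : maskOf ((PySem.List.pyRange 0 n).filter (fun u => u != v)) ||| 2 ^ v.toNat
        = 2 ^ n.toNat - 1 := by
      apply Nat.eq_of_testBit_eq
      intro b
      rw [Nat.testBit_or, Nat.testBit_two_pow, Nat.testBit_two_pow_sub_one,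
        maskOf_testBit _ (fun x hx => (hrest x hx).1) b]
      simp only [List.mem_filter, bne_iff_ne, pvMemRange0]
      by_cases hbv : (b : Int) = v
      · have hvb : v.toNat = b := by omega
        simp [hvb, hbv]
        try omega
      · have hvb : v.toNat ≠ b := by omega
        simp [hvb, hbv]
        try omega
    rw [pathsB_eq A (PySem.List.pyRange 0 n) n.toNat _ v
      (List.Nodup.filter _ (pvRangeNodup n)) hrest h0v (by omega)
      (by intro hc; have := List.mem_filter.mp hc; simp at this), hmask]
  have hadj : ∀ u < n.toNat, ∀ w < n.toNat,
      adjSub A (PySem.List.pyRange 0 n) u w = adjA A u w := by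
    intro u hu w hw
    have e1 : PySem.List.pyGetD (PySem.List.pyRange 0 n) ((u : Nat) : Int) 0 = ((u : Nat) : Int) := by
      rw [pvRange0, PySem.List.pyGetD_natCast, PySem.List.getD_map_range _ _ _ _ hu]
    have e2 : PySem.List.pyGetD (PySem.List.pyRange 0 n) ((w : Nat) : Int) 0 = ((w : Nat) : Int) := by
      rw [pvRange0, PySem.List.pyGetD_natCast, PySem.List.getD_map_range _ _ _ _ hw]
    rw [adjSub, adjA, e1, e2]
  refine Prod.ext ?_ ?_ <;>
  · dsimp only
    rw [PySem.List.foldl_add, zero_add]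
    apply congrArg List.sum
    apply List.map_congr_left
    intro v hv
    obtain ⟨h0v, hvn⟩ := pvMemRange0.mp hv
    rw [hpaths v hv, gsp_congr hadj _ _ (by omega)]

-- ---- A-side: the set-valued DP computes rch ----

def SVv (d : PySem.Dict Int (PySem.Set Int)) (m v : Int) : Prop :=
  v ∈ d.getD m PySem.Set.empty

theorem SV_stepU (Mx : List (List Int)) (m5 : Int) (d : PySem.Dict Int (PySem.Set Int))
    (v u m' u' : Int) :
    SVv (setStepU Mx m5 d v u) m' u' ↔ SVv d m' u' ∨
      (PySem.Int.band m5 ((1 : Int) <<< u.toNat) = 0 ∧ agA Mx v u ≠ 0 ∧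
        m' = PySem.Int.bor m5 ((1 : Int) <<< u.toNat) ∧ u' = u) := by
  unfold setStepU SVv
  by_cases hc : PySem.Int.band m5 ((1 : Int) <<< u.toNat) = 0 ∧ agA Mx v u ≠ 0
  · rw [if_pos hc]
    show u' ∈ (d.insert _ _).getD m' PySem.Set.empty ↔ _
    rw [PySem.Dict.getD_insert]
    by_cases hm : m' = PySem.Int.bor m5 ((1 : Int) <<< u.toNat)
    · subst hm
      rw [if_pos rfl, PySem.Set.mem_add]
      constructor
      · rintro (h | h)
        · exact Or.inl h
        · exact Or.inr ⟨hc.1, hc.2, rfl, h⟩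
      · rintro (h | ⟨_, _, _, h⟩)
        · exact Or.inl h
        · exact Or.inr h
    · rw [if_neg hm]
      constructor
      · exact Or.inl
      · rintro (h | ⟨_, _, hm', _⟩)
        · exact h
        · exact absurd hm' hm
  · rw [if_neg hc]
    constructor
    · exact Or.inl
    · rintro (h | ⟨h1, h2, _, _⟩)
      · exact h
      · exact absurd ⟨h1, h2⟩ hc

theorem SV_uloop (Mx : List (List Int)) (m5 v : Int) :
    ∀ (L : List Int) (d : PySem.Dict Int (PySem.Set Int)) (m' u' : Int),
    SVv (L.foldl (fun d u => setStepU Mx m5 d v u) d) m' u' ↔ SVv d m' u' ∨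
      (u' ∈ L ∧ PySem.Int.band m5 ((1 : Int) <<< u'.toNat) = 0 ∧ agA Mx v u' ≠ 0 ∧
        m' = PySem.Int.bor m5 ((1 : Int) <<< u'.toNat)) := by
  intro L
  induction L with
  | nil => intro d m' u'; simp
  | cons x xs ih =>
    intro d m' u'
    rw [List.foldl_cons, ih, SV_stepU]
    constructor
    · rintro ((h | ⟨h1, h2, h3, rfl⟩) | ⟨h1, h2, h3, h4⟩)
      · exact Or.inl h
      · exact Or.inr ⟨List.mem_cons_self, h1, h2, h3⟩
      · exact Or.inr ⟨List.mem_cons_of_mem _ h1, h2, h3, h4⟩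
    · rintro (h | ⟨h1, h2, h3, h4⟩)
      · exact Or.inl (Or.inl h)
      · rcases List.mem_cons.mp h1 with h1 | h1
        · subst h1
          exact Or.inl (Or.inr ⟨h2, h3, h4, rfl⟩)
        · exact Or.inr ⟨h1, h2, h3, h4⟩

theorem SV_snap (Mx : List (List Int)) (m5 kk : Int) :
    ∀ (snap : List Int) (d : PySem.Dict Int (PySem.Set Int)) (m' u' : Int),
    SVv (snap.foldl (fun d v =>
        (PySem.List.pyRange 0 kk).foldl (fun d u => setStepU Mx m5 d v u) d) d) m' u'
      ↔ SVv d m' u' ∨ ∃ v ∈ snap,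
        (u' ∈ PySem.List.pyRange 0 kk ∧ PySem.Int.band m5 ((1 : Int) <<< u'.toNat) = 0 ∧
          agA Mx v u' ≠ 0 ∧ m' = PySem.Int.bor m5 ((1 : Int) <<< u'.toNat)) := by
  intro snap
  induction snap with
  | nil => intro d m' u'; simp
  | cons x xs ih =>
    intro d m' u'
    rw [List.foldl_cons, ih, SV_uloop]
    constructor
    · rintro ((h | ⟨h1, h2, h3, h4⟩) | ⟨v, hv, hrest⟩)
      · exact Or.inl h
      · exact Or.inr ⟨x, List.mem_cons_self, h1, h2, h3, h4⟩
      · exact Or.inr ⟨v, List.mem_cons_of_mem _ hv, hrest⟩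
    · rintro (h | ⟨v, hv, h1, h2, h3, h4⟩)
      · exact Or.inl (Or.inl h)
      · rcases List.mem_cons.mp hv with hv | hv
        · subst hv
          exact Or.inl (Or.inr ⟨h1, h2, h3, h4⟩)
        · exact Or.inr ⟨v, hv, h1, h2, h3, h4⟩

def rmid (adj : Nat → Nat → Bool) (k M : Nat) (m v : Int) : Prop :=
  (m = 1 ∧ v = 0) ∨
    (0 ≤ m ∧ 0 ≤ v ∧ v.toNat < k ∧ m.toNat < 2 ^ k ∧ m.toNat.testBit v.toNat = true ∧
      0 < m.toNat ^^^ 2 ^ v.toNat ∧ m.toNat ^^^ 2 ^ v.toNat < M ∧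
      ∃ u < k, rch adj k (m.toNat ^^^ 2 ^ v.toNat) u = true ∧ adj u v.toNat = true)

def InvS (Mx : List (List Int)) (kk : Int) (d : PySem.Dict Int (PySem.Set Int)) (M : Nat) : Prop :=
  ∀ m v : Int, SVv d m v ↔ rmid (adjA Mx) kk.toNat M m v

theorem InvS_init (Mx : List (List Int)) (kk : Int) (M : Nat) (hM : M ≤ 1) :
    InvS Mx kk (PySem.Dict.empty.insert 1 (PySem.Set.add PySem.Set.empty 0)) M := by
  intro m v
  unfold SVv rmid
  rw [PySem.Dict.getD_insert]
  constructor
  · intro h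
    by_cases hm : m = 1
    · rw [if_pos hm] at h
      rw [PySem.Set.mem_add] at h
      rcases h with h | h
      · simp [PySem.Set.empty] at h
      · exact Or.inl ⟨hm, h⟩
    · rw [if_neg hm] at h
      rw [PySem.Dict.getD_empty] at h
      simp [PySem.Set.empty] at h
  · rintro (⟨hm, hv⟩ | ⟨_, _, _, _, _, hx1, hx2, _⟩)
    · subst hm; subst hv
      rw [if_pos rfl, PySem.Set.mem_add]
      exact Or.inr rfl
    · omega

theorem rmid_iff_rch (adj : Nat → Nat → Bool) (K M W : Nat) (hW1 : 1 ≤ W) (hWK : W < 2 ^ K)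
    (hWM : W ≤ M) (hK : 0 < K) (v : Int) :
    rmid adj K M ((W : Nat) : Int) v ↔ (0 ≤ v ∧ v.toNat < K ∧ rch adj K W v.toNat = true) := by
  unfold rmid
  have hWt : (((W : Nat) : Int)).toNat = W := Int.toNat_natCast W
  constructor
  · rintro (⟨hm, hv⟩ | ⟨_, h0v, hvK, _, hbit, hx0, hxM, u, huK, hrch, hadj⟩)
    · have hW : W = 1 := by omega
      subst hW
      have hv0 : v = 0 := hv
      subst hv0
      refine ⟨le_refl 0, hK, ?_⟩
      rw [rch_one]
      simp
    · rw [hWt] at hbit hx0 hxM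
      refine ⟨h0v, hvK, ?_⟩
      rw [rch, dif_pos hbit,
        if_neg (fun he => by rw [he] at hx0; simp at hx0)]
      rw [List.any_eq_true]
      refine ⟨u, List.mem_range.mpr huK, ?_⟩
      rw [Bool.and_eq_true, Bool.and_eq_true]
      exact ⟨⟨rch_testBit hrch, hadj⟩, hrch⟩
  · rintro ⟨h0v, hvK, hrch⟩
    rw [rch] at hrch
    by_cases hbit : W.testBit v.toNat = true
    · rw [dif_pos hbit] at hrch
      by_cases he : W = 2 ^ v.toNat
      · rw [if_pos he] at hrch
        have hv0 : v.toNat = 0 := by simpa using hrch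
        have hW1' : W = 1 := by rw [he, hv0]; rfl
        exact Or.inl ⟨by rw [hW1']; rfl, by omega⟩
      · rw [if_neg he] at hrch
        rw [List.any_eq_true] at hrch
        obtain ⟨u, hu, hterm⟩ := hrch
        rw [Bool.and_eq_true, Bool.and_eq_true] at hterm
        refine Or.inr ⟨by positivity, h0v, hvK, by rw [hWt]; exact hWK, by rw [hWt]; exact hbit,
          ?_, ?_, u, List.mem_range.mp hu, ?_, hterm.1.2⟩
        · rw [hWt]
          exact Nat.pos_of_ne_zero (fun h0 => he (Nat.xor_eq_zero_iff.mp h0))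
        · rw [hWt]
          exact lt_of_lt_of_le (pvXorLt hbit) hWM
        · rw [hWt]
          exact hterm.2
    · rw [dif_neg hbit] at hrch
      cases hrch

theorem rmid_mono {adj : Nat → Nat → Bool} {k M M' : Nat} (h : M ≤ M') {m v : Int}
    (hr : rmid adj k M m v) : rmid adj k M' m v := by
  unfold rmid at *
  rcases hr with h' | ⟨h1, h2, h3, h4, h5, h6, h7, h8⟩
  · exact Or.inl h'
  · exact Or.inr ⟨h1, h2, h3, h4, h5, h6, by omega, h8⟩

theorem InvS_step (Mx : List (List Int)) (kk : Int) (hK : 0 < kk.toNat) (M : Nat)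
    (h1 : 1 ≤ M) (h2 : M < 2 ^ kk.toNat) (d : PySem.Dict Int (PySem.Set Int))
    (hInv : InvS Mx kk d M) :
    InvS Mx kk (if PySem.Int.band ((M : Nat) : Int) 1 = 0 then d
      else (d.getD ((M : Nat) : Int) PySem.Set.empty).foldl
        (fun d v => (PySem.List.pyRange 0 kk).foldl
          (fun d u => setStepU Mx ((M : Nat) : Int) d v u) d) d) (M + 1) := by
  have hmi0 : (0 : Int) ≤ ((M : Nat) : Int) := by positivity
  have hmiN : (((M : Nat) : Int)).toNat = M := Int.toNat_natCast M
  have h10 : ((1 : Int) <<< (0 : Nat)) = 1 := by rw [Int.shiftLeft_eq]; ring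
  have hbandM : ∀ t : Nat, (PySem.Int.band ((M : Nat) : Int) ((1 : Int) <<< t) = 0)
      ↔ M.testBit t = false := by
    intro t
    rw [pvBandPow _ hmi0 t, hmiN]
  have hborM : ∀ t : Nat, PySem.Int.bor ((M : Nat) : Int) ((1 : Int) <<< t)
      = ((M ||| 2 ^ t : Nat) : Int) := by
    intro t
    rw [pvBorPow _ hmi0 t, hmiN]
  by_cases hev : PySem.Int.band ((M : Nat) : Int) 1 = 0
  · rw [if_pos hev]
    have heven : M.testBit 0 = false := by
      rw [← hmiN, ← pvBandPow _ hmi0 0]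
      rw [h10]
      exact hev
    intro m v
    rw [hInv m v]
    constructor
    · exact rmid_mono (by omega)
    · intro hr
      unfold rmid at hr ⊢
      rcases hr with h' | ⟨ha, hb, hcx, hd, he, hf, hg, u, huK, hrch, hadj⟩
      · exact Or.inl h'
      · by_cases hxM : m.toNat ^^^ 2 ^ v.toNat = M
        · rw [hxM] at hrch
          rw [rch_even M u heven] at hrch
          cases hrch
        · exact Or.inr ⟨ha, hb, hcx, hd, he, hf, by omega, u, huK, hrch, hadj⟩
  · rw [if_neg hev]
    have hsnapmem : ∀ v : Int, (v ∈ d.getD ((M : Nat) : Int) PySem.Set.empty)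
        ↔ (0 ≤ v ∧ v.toNat < kk.toNat ∧ rch (adjA Mx) kk.toNat M v.toNat = true) := by
      intro v
      exact (hInv _ v).trans (rmid_iff_rch (adjA Mx) kk.toNat M M h1 h2 le_rfl hK v)
    intro m' v'
    rw [SV_snap, hInv m' v']
    constructor
    · rintro (hold | ⟨v, hvsnap, hu'mem, hband', hedge, hbor'⟩)
      · exact rmid_mono (by omega) hold
      · obtain ⟨hv0, hvK, hrch⟩ := (hsnapmem v).mp hvsnap
        obtain ⟨h0v', hv'kk⟩ := pvMemRange0.mp hu'mem
        have htk : v'.toNat < kk.toNat := by omega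
        have hMbit : M.testBit v'.toNat = false := (hbandM v'.toNat).mp hband'
        have hm' : m' = ((M ||| 2 ^ v'.toNat : Nat) : Int) := by rw [hbor', hborM]
        have hm'toNat : m'.toNat = M ||| 2 ^ v'.toNat := by rw [hm', Int.toNat_natCast]
        have hxor : (M ||| 2 ^ v'.toNat) ^^^ 2 ^ v'.toNat = M := pvOrXor M v'.toNat hMbit
        have hadj : adjA Mx v.toNat v'.toNat = true := by
          rw [adjA, show ((v.toNat : Nat) : Int) = v by omega,
            show ((v'.toNat : Nat) : Int) = v' by omega]
          simpa [bne_iff_ne] using hedge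
        refine Or.inr ⟨by rw [hm']; positivity, h0v', htk, ?_, ?_, ?_, ?_,
          v.toNat, by omega, ?_, hadj⟩
        · rw [hm'toNat]
          exact Nat.or_lt_two_pow h2 (Nat.pow_lt_pow_right one_lt_two htk)
        · rw [hm'toNat, Nat.testBit_or, Nat.testBit_two_pow_self, Bool.or_true]
        · rw [hm'toNat, hxor]; omega
        · rw [hm'toNat, hxor]; omega
        · rw [hm'toNat, hxor]; exact hrch
    · intro hr
      unfold rmid at hr
      rcases hr with h' | ⟨h0m, h0v, hvK, hmK, hbit, hx0, hxM1, u, huK, hrch, hadj⟩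
      · exact Or.inl (Or.inl h')
      · by_cases hxM : m'.toNat ^^^ 2 ^ v'.toNat = M
        · right
          refine ⟨(u : Int), ?_, ?_, ?_, ?_, ?_⟩
          · apply (hsnapmem (u : Int)).mpr
            refine ⟨by positivity, by rw [Int.toNat_natCast]; omega, ?_⟩
            rw [Int.toNat_natCast]
            rw [hxM] at hrch
            exact hrch
          · apply pvMemRange0.mpr
            constructor
            · exact h0v
            · omega
          · apply (hbandM v'.toNat).mpr
            rw [← hxM]
            exact pvXorNoBit hbit
          · rw [adjA] at hadj
            rw [show ((u : Nat) : Int) = (u : Int) from rfl] at hadj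
            rw [show ((v'.toNat : Nat) : Int) = v' by omega] at hadj
            simpa [bne_iff_ne] using hadj
          · rw [hborM v'.toNat]
            have : M ||| 2 ^ v'.toNat = m'.toNat := by
              rw [← hxM]
              exact pvXorRecover hbit
            rw [this]
            omega
        · left
          exact Or.inr ⟨h0m, h0v, hvK, hmK, hbit, hx0, by omega, u, huK, hrch, hadj⟩

theorem InvS_loop (Mx : List (List Int)) (kk : Int) (hK : 0 < kk.toNat) :
    InvS Mx kk (setDP Mx kk ((2 ^ kk.toNat : Nat) : Int)) (2 ^ kk.toNat) := by
  have H : ∀ M : Nat, M ≤ 2 ^ kk.toNat →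
      InvS Mx kk ((PySem.List.pyRange 1 ((M : Nat) : Int)).foldl
        (fun d m5 =>
          if PySem.Int.band m5 1 = 0 then d
          else
            (d.getD m5 PySem.Set.empty).foldl
              (fun d v => (PySem.List.pyRange 0 kk).foldl (fun d u => setStepU Mx m5 d v u) d) d)
        (PySem.Dict.empty.insert 1 (PySem.Set.add PySem.Set.empty 0))) M := by
    intro M
    induction M with
    | zero =>
      intro _
      rw [show (((0 : Nat) : Int)) = (0 : Int) by norm_num, pvRangeNil (a := 1) (b := 0) (by norm_num)]
      exact InvS_init Mx kk 0 (by omega)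
    | succ M ih =>
      intro hle
      by_cases hM : M = 0
      · subst hM
        rw [show (((0 + 1 : Nat) : Int)) = (1 : Int) by norm_num,
          pvRangeNil (a := 1) (b := 1) (by norm_num)]
        exact InvS_init Mx kk 1 le_rfl
      · have h1 : 1 ≤ M := by omega
        rw [show (((M + 1 : Nat)) : Int) = ((M : Nat) : Int) + 1 by push_cast; ring,
          PySem.List.pyRange_one_succ_right (by exact_mod_cast h1), List.foldl_append]
        simp only [List.foldl_cons, List.foldl_nil]
        exact InvS_step Mx kk hK M h1 (by omega) _ (ih (by omega))
  have h2 := H (2 ^ kk.toNat) le_rfl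
  unfold setDP
  exact h2

-- ---- glue: t3 ----

theorem t3_eq (A : List (List Int)) (n : Int) :
    t3A A n = (PySem.List.pyRange 0 n).foldl (fun acc i =>
      (PySem.List.pyRange (i + 1) n).foldl (fun acc j =>
        (PySem.List.pyRange (j + 1) n).foldl (fun acc k =>
          if (agA A i j ≠ 0 ∧ agA A j k ≠ 0 ∧ agA A k i ≠ 0) ∨
             (agA A i k ≠ 0 ∧ agA A k j ≠ 0 ∧ agA A j i ≠ 0) then acc + 1
          else acc) acc) acc) 0 := by
  unfold t3A
  apply PySem.List.foldl_congr_mem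
  intro acc i _
  apply PySem.List.foldl_congr_mem
  intro acc j _
  apply PySem.List.foldl_congr_mem
  intro acc k _
  by_cases h1 : (agA A i j ≠ 0 ∧ agA A j k ≠ 0 ∧ agA A k i ≠ 0)
  · rw [if_pos h1, if_pos (Or.inl h1)]
  · rw [if_neg h1]
    by_cases h2 : (agA A i k ≠ 0 ∧ agA A k j ≠ 0 ∧ agA A j i ≠ 0)
    · rw [if_pos h2, if_pos (Or.inr h2)]
    · rw [if_neg h2, if_neg (by tauto)]

-- ---- glue: the two set-DP read-outs agree ----

theorem rch_fullzero (adj : Nat → Nat → Bool) (K : Nat) (hK : 2 ≤ K) :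
    rch adj K (2 ^ K - 1) 0 = false := by
  have h4 : 4 ≤ 2 ^ K := by
    calc (4 : Nat) = 2 ^ 2 := rfl
    _ ≤ 2 ^ K := Nat.pow_le_pow_right (by norm_num) hK
  have hb : (2 ^ K - 1).testBit 0 = true := by
    rw [Nat.testBit_two_pow_sub_one]
    simp [show 0 < K by omega]
  rw [rch, dif_pos hb, if_neg (by rw [pow_zero]; omega)]
  apply List.any_eq_false.mpr
  intro u _
  have hbit0 : ((2 ^ K - 1) ^^^ 2 ^ 0).testBit 0 = false := by
    rw [Nat.testBit_xor, hb]
    simp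
  rw [rch_even _ u hbit0]
  simp

theorem setA_any_iff (Mx : List (List Int)) (kk : Int) (hK : 2 ≤ kk.toNat) :
    (((setDP Mx kk ((2 ^ kk.toNat : Nat) : Int)).getD ((2 ^ kk.toNat - 1 : Nat) : Int)
        PySem.Set.empty).any (fun v => agA Mx v 0 != 0) = true)
      ↔ ∃ vN : Nat, 0 < vN ∧ vN < kk.toNat ∧
          rch (adjA Mx) kk.toNat (2 ^ kk.toNat - 1) vN = true ∧ adjA Mx vN 0 = true := by
  have hloop := InvS_loop Mx kk (by omega)
  have h1f : 1 ≤ 2 ^ kk.toNat - 1 := by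
    have : 4 ≤ 2 ^ kk.toNat := by
      calc (4 : Nat) = 2 ^ 2 := rfl
      _ ≤ 2 ^ kk.toNat := Nat.pow_le_pow_right (by norm_num) hK
    omega
  rw [List.any_eq_true]
  constructor
  · rintro ⟨v, hvmem, hped⟩
    have hr := (hloop ((2 ^ kk.toNat - 1 : Nat) : Int) v).mp hvmem
    rw [rmid_iff_rch (adjA Mx) kk.toNat (2 ^ kk.toNat) (2 ^ kk.toNat - 1) h1f (by omega)
      (by omega) (by omega) v] at hr
    obtain ⟨h0v, hvK, hrch⟩ := hr
    refine ⟨v.toNat, ?_, hvK, hrch, ?_⟩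
    · rcases Nat.eq_zero_or_pos v.toNat with h0 | h0
      · rw [h0] at hrch
        rw [rch_fullzero _ _ hK] at hrch
        cases hrch
      · exact h0
    · rw [adjA, show ((v.toNat : Nat) : Int) = v by omega,
        show (((0 : Nat)) : Int) = (0 : Int) from rfl]
      exact hped
  · rintro ⟨vN, hv0, hvK, hrch, hadj⟩
    refine ⟨(vN : Int), ?_, ?_⟩
    · apply (hloop ((2 ^ kk.toNat - 1 : Nat) : Int) (vN : Int)).mpr
      rw [rmid_iff_rch (adjA Mx) kk.toNat (2 ^ kk.toNat) (2 ^ kk.toNat - 1) h1f (by omega)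
        (by omega) (by omega)]
      exact ⟨by positivity, by rw [Int.toNat_natCast]; exact hvK,
        by rw [Int.toNat_natCast]; exact hrch⟩
    · rw [adjA, show (((0 : Nat)) : Int) = (0 : Int) from rfl] at hadj
      exact hadj

theorem pvRangeNodupAB (a b : Int) : (PySem.List.pyRange a b).Nodup := by
  suffices H : ∀ (N : Nat) (a b : Int), (b - a).toNat ≤ N → (PySem.List.pyRange a b).Nodup by
    exact H (b - a).toNat a b le_rfl
  intro N
  induction N with
  | zero =>
    intro a b h
    rw [pvRangeNil (by omega)]
    exact List.nodup_nil
  | succ N ih =>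
    intro a b h
    by_cases hab : a < b
    · rw [PySem.List.pyRange_one_cons hab]
      refine List.nodup_cons.mpr ⟨?_, ih (a + 1) b (by omega)⟩
      intro hc
      have := PySem.List.mem_pyRange_one.mp hc
      omega
    · rw [pvRangeNil (by omega)]
      exact List.nodup_nil

theorem pvRangeGetI (n : Int) (v : Int) (h0 : 0 ≤ v) (hv : v < n) :
    PySem.List.pyGetD (PySem.List.pyRange 0 n) v 0 = v := by
  rw [show v = ((v.toNat : Nat) : Int) by omega, pvRange0, PySem.List.pyGetD_natCast,
    PySem.List.getD_map_range _ _ _ _ (by omega)]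

theorem pvMaskCyc (K : Nat) (hK : 0 < K) (v : Int) (hv1 : 1 ≤ v) (hvK : v < ((K : Nat) : Int)) :
    maskOf ((PySem.List.pyRange 1 ((K : Nat) : Int)).filter (fun u => u != v))
        ||| 2 ^ v.toNat ||| 1 = 2 ^ K - 1 := by
  have hnn : ∀ x ∈ (PySem.List.pyRange 1 ((K : Nat) : Int)).filter (fun u => u != v), 0 ≤ x := by
    intro x hx
    have := PySem.List.mem_pyRange_one.mp (List.mem_of_mem_filter hx)
    omega
  apply Nat.eq_of_testBit_eq
  intro b
  rw [Nat.testBit_or, Nat.testBit_or, maskOf_testBit _ hnn b, Nat.testBit_two_pow,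
    Nat.testBit_two_pow_sub_one, show (1 : Nat) = 2 ^ 0 from rfl, Nat.testBit_two_pow]
  simp only [List.mem_filter, bne_iff_ne, PySem.List.mem_pyRange_one]
  by_cases hbv : (b : Int) = v
  · have hvb : v.toNat = b := by omega
    simp [hvb, hbv]
    omega
  · by_cases hb0 : b = 0
    · subst hb0
      simp [hbv, show v.toNat ≠ 0 by omega]
      omega
    · have hvb : v.toNat ≠ b := by omega
      simp [hvb, hbv, Ne.symm hb0]
      omega

theorem Bany_iff (A : List (List Int)) (sub : List Int) (K : Nat) (hK : 2 ≤ K) :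
    (((PySem.List.pyRange 1 ((K : Nat) : Int)).any (fun v =>
      (agA A (PySem.List.pyGetD sub v 0) (PySem.List.pyGetD sub 0 0) != 0) &&
        hampathB A sub ((PySem.List.pyRange 1 ((K : Nat) : Int)).filter (fun u => u != v)) v)) = true)
    ↔ ∃ vN : Nat, 0 < vN ∧ vN < K ∧ rch (adjSub A sub) K (2 ^ K - 1) vN = true
        ∧ adjSub A sub vN 0 = true := by
  have hham : ∀ v ∈ PySem.List.pyRange 1 ((K : Nat) : Int),
      hampathB A sub ((PySem.List.pyRange 1 ((K : Nat) : Int)).filter (fun u => u != v)) v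
        = rch (adjSub A sub) K (2 ^ K - 1) v.toNat := by
    intro v hv
    obtain ⟨hv1, hvK⟩ := PySem.List.mem_pyRange_one.mp hv
    rw [hampathB_eq A sub K _ v (List.Nodup.filter _ (pvRangeNodupAB 1 _))
      (fun x hx => by
        have := PySem.List.mem_pyRange_one.mp (List.mem_of_mem_filter hx)
        constructor
        · omega
        · omega)
      (by omega) (by omega)
      (by intro hc; have := List.mem_filter.mp hc; simp at this)]
    rw [show maskOf ((PySem.List.pyRange 1 ((K : Nat) : Int)).filter (fun u => u != v))
        ||| 2 ^ v.toNat ||| 1 = 2 ^ K - 1 from pvMaskCyc K (by omega) v hv1 hvK]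
  rw [List.any_eq_true]
  constructor
  · rintro ⟨v, hv, hterm⟩
    obtain ⟨hv1, hvK⟩ := PySem.List.mem_pyRange_one.mp hv
    rw [Bool.and_eq_true, hham v hv] at hterm
    refine ⟨v.toNat, by omega, by omega, hterm.2, ?_⟩
    rw [adjSub, show ((v.toNat : Nat) : Int) = v by omega,
      show (((0 : Nat)) : Int) = (0 : Int) from rfl]
    exact hterm.1
  · rintro ⟨vN, h0, hKv, hrch, hadj⟩
    have hmem : ((vN : Nat) : Int) ∈ PySem.List.pyRange 1 ((K : Nat) : Int) := by
      apply PySem.List.mem_pyRange_one.mpr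
      constructor
      · exact_mod_cast Nat.one_le_iff_ne_zero.mpr (by omega)
      · exact_mod_cast hKv
    refine ⟨(vN : Int), hmem, ?_⟩
    rw [Bool.and_eq_true, hham _ hmem]
    constructor
    · rw [adjSub, show (((0 : Nat)) : Int) = (0 : Int) from rfl] at hadj
      exact hadj
    · rw [Int.toNat_natCast]
      exact hrch

theorem adj_local (A : List (List Int)) (sub : List Int) (u w : Nat) (hu : u < 5) (hw : w < 5) :
    adjA (localM A sub) u w = adjSub A sub u w := by
  rw [adjA, adjSub]
  interval_cases u <;> interval_cases w <;> rfl

theorem t5sub_eq (A : List (List Int)) (sub : List Int) :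
    (((setDP (localM A sub) 5 32).getD 31 PySem.Set.empty).any
        (fun v => agA (localM A sub) v 0 != 0))
      = ((PySem.List.pyRange 1 5).any (fun v =>
          (agA A (PySem.List.pyGetD sub v 0) (PySem.List.pyGetD sub 0 0) != 0) &&
            hampathB A sub ((PySem.List.pyRange 1 5).filter (fun u => u != v)) v)) := by
  rw [Bool.eq_iff_iff]
  rw [show (32 : Int) = ((2 ^ ((5 : Int)).toNat : Nat) : Int) by decide,
    show (31 : Int) = ((2 ^ ((5 : Int)).toNat - 1 : Nat) : Int) by decide]
  have hA := setA_any_iff (localM A sub) 5 (by decide)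
  rw [show ((5 : Int)).toNat = 5 from rfl] at hA
  rw [show ((5 : Int)).toNat = 5 from rfl]
  rw [hA]
  have hB := Bany_iff A sub 5 (by norm_num)
  rw [show (((5 : Nat)) : Int) = (5 : Int) from rfl] at hB
  rw [hB]
  have hcongr : ∀ m vN, vN < 5 →
      rch (adjA (localM A sub)) 5 m vN = rch (adjSub A sub) 5 m vN :=
    fun m vN h => rch_congr (fun u hu w hw => adj_local A sub u w hu hw) m vN h
  constructor
  · rintro ⟨vN, h0, h5, hr, ha⟩
    rw [hcongr _ vN h5] at hr
    rw [adj_local A sub vN 0 h5 (by norm_num)] at ha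
    exact ⟨vN, h0, h5, hr, ha⟩
  · rintro ⟨vN, h0, h5, hr, ha⟩
    rw [← hcongr _ vN h5] at hr
    rw [← adj_local A sub vN 0 h5 (by norm_num)] at ha
    exact ⟨vN, h0, h5, hr, ha⟩

theorem t5_eq (A : List (List Int)) (n : Int) :
    t5A A n = (PySem.List.combinations (PySem.List.pyRange 0 n) 5).foldl
      (fun acc sub =>
        if (PySem.List.pyRange 1 5).any (fun v =>
            (agA A (PySem.List.pyGetD sub v 0) (PySem.List.pyGetD sub 0 0) != 0) &&
              hampathB A sub ((PySem.List.pyRange 1 5).filter (fun u => u != v)) v) then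
          acc + 1
        else acc) 0 := by
  unfold t5A
  apply PySem.List.foldl_congr_mem
  intro acc sub _
  show (if ((setDP (localM A sub) 5 32).getD 31 PySem.Set.empty).any
      (fun v => agA (localM A sub) v 0 != 0) then acc + 1 else acc) = _
  rw [t5sub_eq A sub]

theorem t7_eq (A : List (List Int)) (n : Int) :
    t7A A n = (if n = 7 then
      (if (PySem.List.pyRange 1 7).any (fun v =>
          (agA A v 0 != 0) &&
            hampathB A (PySem.List.pyRange 0 7)
              ((PySem.List.pyRange 1 7).filter (fun u => u != v)) v)
        then (1 : Int) else 0)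
      else 0) := by
  unfold t7A
  by_cases h7 : n = 7
  · rw [if_pos h7, if_pos h7]
    subst h7
    show (if ((setDP A 7 ((1 : Int) <<< ((7 : Int)).toNat)).getD
        ((1 : Int) <<< ((7 : Int)).toNat - 1) PySem.Set.empty).any
        (fun v => agA A v 0 != 0) then (1 : Int) else 0) = _
    have hbool : ((setDP A 7 ((1 : Int) <<< ((7 : Int)).toNat)).getD
        ((1 : Int) <<< ((7 : Int)).toNat - 1) PySem.Set.empty).any (fun v => agA A v 0 != 0)
        = (PySem.List.pyRange 1 7).any (fun v =>
            (agA A v 0 != 0) &&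
              hampathB A (PySem.List.pyRange 0 7)
                ((PySem.List.pyRange 1 7).filter (fun u => u != v)) v) := by
      rw [Bool.eq_iff_iff]
      rw [show ((1 : Int) <<< ((7 : Int)).toNat - 1) = ((2 ^ ((7 : Int)).toNat - 1 : Nat) : Int) by decide,
        show ((1 : Int) <<< ((7 : Int)).toNat) = ((2 ^ ((7 : Int)).toNat : Nat) : Int) by decide]
      have hA := setA_any_iff A 7 (by decide)
      rw [show ((7 : Int)).toNat = 7 from rfl] at hA
      rw [show ((7 : Int)).toNat = 7 from rfl]
      rw [hA]
      have hBalign : ((PySem.List.pyRange 1 7).any (fun v =>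
          (agA A v 0 != 0) &&
            hampathB A (PySem.List.pyRange 0 7)
              ((PySem.List.pyRange 1 7).filter (fun u => u != v)) v))
          = ((PySem.List.pyRange 1 7).any (fun v =>
          (agA A (PySem.List.pyGetD (PySem.List.pyRange 0 7) v 0)
              (PySem.List.pyGetD (PySem.List.pyRange 0 7) 0 0) != 0) &&
            hampathB A (PySem.List.pyRange 0 7)
              ((PySem.List.pyRange 1 7).filter (fun u => u != v)) v)) := by
        apply PySem.List.any_congr_mem
        intro v hv
        obtain ⟨hv1, hv7⟩ := PySem.List.mem_pyRange_one.mp hv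
        rw [pvRangeGetI 7 v (by omega) (by omega), pvRangeGetI 7 0 (by omega) (by omega)]
      rw [hBalign]
      have hB := Bany_iff A (PySem.List.pyRange 0 7) 7 (by norm_num)
      rw [show (((7 : Nat)) : Int) = (7 : Int) from rfl] at hB
      rw [hB]
      have hadj : ∀ u < 7, ∀ w < 7, adjSub A (PySem.List.pyRange 0 7) u w = adjA A u w := by
        intro u hu w hw
        rw [adjSub, adjA,
          pvRangeGetI 7 ((u : Nat) : Int) (by positivity) (by exact_mod_cast hu),
          pvRangeGetI 7 ((w : Nat) : Int) (by positivity) (by exact_mod_cast hw)]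
      have hcongr : ∀ m vN, vN < 7 →
          rch (adjA A) 7 m vN = rch (adjSub A (PySem.List.pyRange 0 7)) 7 m vN :=
        fun m vN h => (rch_congr (fun u hu w hw => hadj u hu w hw) m vN h).symm
      constructor
      · rintro ⟨vN, h0, h7', hr, ha⟩
        rw [hcongr _ vN h7'] at hr
        rw [← hadj vN h7' 0 (by norm_num)] at ha
        exact ⟨vN, h0, h7', hr, ha⟩
      · rintro ⟨vN, h0, h7', hr, ha⟩
        rw [← hcongr _ vN h7'] at hr
        rw [hadj vN h7' 0 (by norm_num)] at ha
        exact ⟨vN, h0, h7', hr, ha⟩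
    rw [hbool]
  · rw [if_neg h7, if_neg h7]

theorem compute_all_unconditional (A : List (List Int)) (n : Int) :
    compute_all A n = compute_all_alt A n := by
  have h4 := countDP_final A n
  have hB := altB_final A n
  show (t3A A n, t5A A n, t7A A n,
      sumRowA (dpA A n).2 ((1 : Int) <<< n.toNat - 1) n,
      sumRowA (dpA A n).1 ((1 : Int) <<< n.toNat - 1) n)
    = compute_all_alt A n
  rw [t3_eq A n, t5_eq A n, t7_eq A n, h4.1, h4.2]
  show _ = ((PySem.List.pyRange 0 n).foldl (fun acc i =>
      (PySem.List.pyRange (i + 1) n).foldl (fun acc j =>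
        (PySem.List.pyRange (j + 1) n).foldl (fun acc k =>
          if (agA A i j ≠ 0 ∧ agA A j k ≠ 0 ∧ agA A k i ≠ 0) ∨
             (agA A i k ≠ 0 ∧ agA A k j ≠ 0 ∧ agA A j i ≠ 0) then acc + 1
          else acc) acc) acc) 0,
    (PySem.List.combinations (PySem.List.pyRange 0 n) 5).foldl
      (fun acc sub =>
        if (PySem.List.pyRange 1 5).any (fun v =>
            (agA A (PySem.List.pyGetD sub v 0) (PySem.List.pyGetD sub 0 0) != 0) &&
              hampathB A sub ((PySem.List.pyRange 1 5).filter (fun u => u != v)) v) then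
          acc + 1
        else acc) 0,
    (if n = 7 then
      (if (PySem.List.pyRange 1 7).any (fun v =>
          (agA A v 0 != 0) &&
            hampathB A (PySem.List.pyRange 0 7)
              ((PySem.List.pyRange 1 7).filter (fun u => u != v)) v)
        then (1 : Int) else 0)
      else 0),
    ((PySem.List.pyRange 0 n).foldl (fun (p : Int × Int) v =>
        (p.1 + (pathsB A (PySem.List.pyRange 0 n)
            ((PySem.List.pyRange 0 n).filter (fun u => u != v)) v).1,
         p.2 + (pathsB A (PySem.List.pyRange 0 n)
            ((PySem.List.pyRange 0 n).filter (fun u => u != v)) v).2)) (0, 0)).2,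
    ((PySem.List.pyRange 0 n).foldl (fun (p : Int × Int) v =>
        (p.1 + (pathsB A (PySem.List.pyRange 0 n)
            ((PySem.List.pyRange 0 n).filter (fun u => u != v)) v).1,
         p.2 + (pathsB A (PySem.List.pyRange 0 n)
            ((PySem.List.pyRange 0 n).filter (fun u => u != v)) v).2)) (0, 0)).1)
  rw [hB]

-- ===== VERDICT (by name: the statement is the Claim_ definition above) =====
theorem compute_all_spec : Claim_equal_compute_all := by
  intro A n _ _
  unfold Spec_compute_all
  exact compute_all_unconditional A n
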